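-- pv_equiv track=rewrite | github.com/phuongdinh1411/cses-analyses | problem_soulutions/Blue/Session 06 - BFS/SPOJ_KOZE.py | calc_survive
-- ===== SOURCE A (Python) =====
-- from collections import deque
--
-- def calc_survive(N, M, matrix):
--     visited = [[False for _ in range(M)] for _ in range(N)]
--
--     dx = [1, 0, -1, 0]
--     dy = [0, -1, 0, 1]
--
--     total_wolves = 0
--     total_sheep = 0
--
--     for row in range(N):
--         for col in range(M):
--             cell = matrix[row][col]
--             if cell in '.kv' and not visited[row][col]:
--                 visited[row][col] = True
--                 q = deque()
--                 q.append([row, col])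
--
--                 sheep_count = 1 if cell == 'k' else 0
--                 wolf_count = 1 if cell == 'v' else 0
--
--                 # Fixed: Check if starting cell is on boundary
--                 is_fenced = not (row == 0 or row == N - 1 or col == 0 or col == M - 1)
--
--                 while q:
--                     curr = q.popleft()
--                     for i in range(4):
--                         nx = curr[0] + dx[i]
--                         ny = curr[1] + dy[i]
--                         if (0 <= nx < N and 0 <= ny < M and
--                             matrix[nx][ny] in '.kv' and
--                             not visited[nx][ny]):
--                             q.append([nx, ny])
--                             visited[nx][ny] = True
--                             if matrix[nx][ny] == 'k':
--                                 sheep_count += 1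
--                             elif matrix[nx][ny] == 'v':
--                                 wolf_count += 1
--                             # Check if this cell is on boundary
--                             if nx == 0 or nx == N - 1 or ny == 0 or ny == M - 1:
--                                 is_fenced = False
--
--                 if is_fenced:
--                     # In a fenced area: only the majority survives
--                     if sheep_count > wolf_count:
--                         total_sheep += sheep_count
--                     else:
--                         total_wolves += wolf_count
--                 else:
--                     # Not fenced: both survive
--                     total_sheep += sheep_count
--                     total_wolves += wolf_count
--
--     return [total_sheep, total_wolves]
-- ===== SOURCE B (Python) =====
-- def calc_survive(N, M, matrix):
--     # Union-find over flattened cell indices instead of per-seed BFS.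
--     if N <= 0 or M <= 0:
--         return [0, 0]
--     parent = list(range(N * M))
--
--     def find(x):
--         while parent[x] != x:
--             x = parent[x]
--         return x
--
--     def union(a, b):
--         ra = find(a)
--         rb = find(b)
--         if ra != rb:
--             if ra < rb:
--                 parent[rb] = ra
--             else:
--                 parent[ra] = rb
--
--     def passable(r, c):
--         return matrix[r][c] in '.kv'
--
--     for r in range(N):
--         for c in range(M):
--             if passable(r, c):
--                 if r + 1 < N and passable(r + 1, c):
--                     union(r * M + c, (r + 1) * M + c)
--                 if c + 1 < M and passable(r, c + 1):
--                     union(r * M + c, r * M + c + 1)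
--
--     sheep = {}
--     wolves = {}
--     open_air = {}
--     for r in range(N):
--         for c in range(M):
--             if passable(r, c):
--                 root = find(r * M + c)
--                 sheep[root] = sheep.get(root, 0) + (1 if matrix[r][c] == 'k' else 0)
--                 wolves[root] = wolves.get(root, 0) + (1 if matrix[r][c] == 'v' else 0)
--                 if r == 0 or r == N - 1 or c == 0 or c == M - 1:
--                     open_air[root] = True
--
--     total_sheep = 0
--     total_wolves = 0
--     for root, s in sheep.items():
--         w = wolves[root]
--         if root in open_air:
--             total_sheep += s
--             total_wolves += w
--         elif s > w:
--             total_sheep += s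
--         else:
--             total_wolves += w
--     return [total_sheep, total_wolves]
-- ===== Notes on version B (the rewrite author's own statement) =====
-- stated objective: alternative
-- what changed: The per-seed BFS flood fill with inline counters is replaced by a disjoint-set union (union by minimum index) over flattened cell indices: one pass unions each passable cell with its right/down passable neighbours, a second pass accumulates per-root sheep/wolf counts and a boundary flag into dicts, and a final pass over the roots applies the fenced/majority rule.
import Mathlib
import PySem

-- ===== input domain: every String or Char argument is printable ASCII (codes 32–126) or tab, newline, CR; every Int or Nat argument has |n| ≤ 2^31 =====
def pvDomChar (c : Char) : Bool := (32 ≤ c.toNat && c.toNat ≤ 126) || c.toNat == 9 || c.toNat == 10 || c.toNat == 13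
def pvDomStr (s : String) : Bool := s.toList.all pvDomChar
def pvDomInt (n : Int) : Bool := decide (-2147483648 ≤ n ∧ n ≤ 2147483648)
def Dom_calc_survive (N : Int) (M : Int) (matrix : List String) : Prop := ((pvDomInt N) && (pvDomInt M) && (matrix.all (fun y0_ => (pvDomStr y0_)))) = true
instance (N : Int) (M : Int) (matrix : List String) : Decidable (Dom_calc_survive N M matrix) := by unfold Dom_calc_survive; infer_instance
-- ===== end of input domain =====

-- B replaces A's per-seed BFS flood fill by a disjoint-set union (union by minimum index) over
-- flattened cell indices: one pass unions adjacent passable cells, a second pass accumulates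
-- per-root counts and a boundary flag into dicts, a third pass applies the fenced/majority rule
-- (objective: alternative; similar asymptotic cost).

-- ===== PORT A =====
-- shared helpers: both Pythons contain these identical lines (matrix[r][c], the '.kv' test
-- and the boundary test); out-of-range matrix access yields '#' (impassable),
-- unreachable under Pre_calc_survive.
def pvCell (matrix : List String) (r c : Int) : Char :=
  match PySem.List.pyGet? matrix r with
  | some row =>
    match PySem.Str.pyGet? row c with
    | some ch => ch
    | none => '#'
  | none => '#'

def pvPassC (ch : Char) : Bool := ch == '.' || ch == 'k' || ch == 'v'

def pvBdry (N M r c : Int) : Bool := decide (r = 0 ∨ r = N - 1 ∨ c = 0 ∨ c = M - 1)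

-- A's visited grid
def pvMkGrid (n m : Nat) : List (List Bool) :=
  (List.range n).map (fun _ => List.replicate m false)

def pvSetN (g : List (List Bool)) (i j : Nat) : List (List Bool) :=
  g.modify i (fun row => row.set j true)

def pvGetN (g : List (List Bool)) (i j : Nat) : Bool := (g.getD i []).getD j false

def pvGet (g : List (List Bool)) (r c : Int) : Bool :=
  if 0 ≤ r ∧ 0 ≤ c then pvGetN g r.toNat c.toNat else false

def pvSet (g : List (List Bool)) (r c : Int) : List (List Bool) := pvSetN g r.toNat c.toNat

-- A's BFS inner step: one direction d of the four, on state (queue, visited, sheep, wolves, fenced)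
def pvStepA (N M : Int) (matrix : List String) (curr : Int × Int)
    (st : List (Int × Int) × List (List Bool) × Int × Int × Bool) (d : Int × Int) :
    List (Int × Int) × List (List Bool) × Int × Int × Bool :=
  if 0 ≤ curr.1 + d.1 ∧ curr.1 + d.1 < N ∧ 0 ≤ curr.2 + d.2 ∧ curr.2 + d.2 < M ∧
      pvPassC (pvCell matrix (curr.1 + d.1) (curr.2 + d.2)) = true ∧
      pvGet st.2.1 (curr.1 + d.1) (curr.2 + d.2) = false then
    (st.1 ++ [(curr.1 + d.1, curr.2 + d.2)],
     pvSet st.2.1 (curr.1 + d.1) (curr.2 + d.2),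
     if pvCell matrix (curr.1 + d.1) (curr.2 + d.2) = 'k' then st.2.2.1 + 1 else st.2.2.1,
     if pvCell matrix (curr.1 + d.1) (curr.2 + d.2) = 'k' then st.2.2.2.1
       else if pvCell matrix (curr.1 + d.1) (curr.2 + d.2) = 'v' then st.2.2.2.1 + 1
       else st.2.2.2.1,
     if pvBdry N M (curr.1 + d.1) (curr.2 + d.2) then false else st.2.2.2.2)
  else st

-- A's 'while q' loop (fuel makes the recursion total; 2*N*M+1 is always enough)
def pvLoopA (N M : Int) (matrix : List String) :
    Nat → List (Int × Int) → List (List Bool) → Int → Int → Bool →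
    List (List Bool) × Int × Int × Bool
  | 0, _, vis, s, w, fd => (vis, s, w, fd)
  | _ + 1, [], vis, s, w, fd => (vis, s, w, fd)
  | f + 1, curr :: q, vis, s, w, fd =>
    let st := [((1 : Int), (0 : Int)), (0, -1), (-1, 0), (0, 1)].foldl
      (pvStepA N M matrix curr) (q, vis, s, w, fd)
    pvLoopA N M matrix f st.1 st.2.1 st.2.2.1 st.2.2.2.1 st.2.2.2.2

-- A's per-cell body
def pvCellA (N M : Int) (matrix : List String)
    (st : List (List Bool) × Int × Int) (row col : Int) : List (List Bool) × Int × Int :=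
  let cell := pvCell matrix row col
  if pvPassC cell = true ∧ pvGet st.1 row col = false then
    let vis := pvSet st.1 row col
    let sheep : Int := if cell = 'k' then 1 else 0
    let wolf : Int := if cell = 'v' then 1 else 0
    let fenced := ! pvBdry N M row col
    let r := pvLoopA N M matrix (2 * (N.toNat * M.toNat) + 1) [(row, col)] vis sheep wolf fenced
    if r.2.2.2 = true then
      if r.2.1 > r.2.2.1 then (r.1, st.2.1 + r.2.1, st.2.2)
      else (r.1, st.2.1, st.2.2 + r.2.2.1)
    else (r.1, st.2.1 + r.2.1, st.2.2 + r.2.2.1)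
  else st

def calc_survive (N : Int) (M : Int) (matrix : List String) : List Int :=
  let fin := (PySem.List.pyRange 0 N 1).foldl
    (fun st row => (PySem.List.pyRange 0 M 1).foldl
      (fun st col => pvCellA N M matrix st row col) st)
    (pvMkGrid N.toNat M.toNat, (0 : Int), (0 : Int))
  [fin.2.1, fin.2.2]

-- ===== PORT B =====
-- B's find: 'while parent[x] != x: x = parent[x]'; the fuel parent.length + 1 is always
-- sufficient because each parent pointer strictly decreases the index (union by minimum);
-- the index x is always in range, so getD's default is never read.
def pvFind (parent : List Int) : Nat → Int → Int
  | 0, x => x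
  | f + 1, x =>
    let p := parent.getD x.toNat 0
    if p = x then x else pvFind parent f p

def pvFindR (parent : List Int) (x : Int) : Int := pvFind parent (parent.length + 1) x

-- B's union(a, b)
def pvUnionOp (parent : List Int) (a b : Int) : List Int :=
  let ra := pvFindR parent a
  let rb := pvFindR parent b
  if ra = rb then parent
  else if ra < rb then parent.set rb.toNat ra
  else parent.set ra.toNat rb

-- B's first-pass body at cell (r, c): union with the passable down/right neighbours
def pvUnite (N M : Int) (matrix : List String) (parent : List Int) (r c : Int) : List Int :=
  if pvPassC (pvCell matrix r c) = true then
    let p1 := if r + 1 < N ∧ pvPassC (pvCell matrix (r + 1) c) = true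
      then pvUnionOp parent (r * M + c) ((r + 1) * M + c) else parent
    if c + 1 < M ∧ pvPassC (pvCell matrix r (c + 1)) = true
      then pvUnionOp p1 (r * M + c) (r * M + c + 1) else p1
  else parent

-- B's second-pass body: accumulate counts and the boundary flag into the three dicts
def pvTally (N M : Int) (matrix : List String) (parent : List Int)
    (st : PySem.Dict Int Int × PySem.Dict Int Int × PySem.Dict Int Bool) (r c : Int) :
    PySem.Dict Int Int × PySem.Dict Int Int × PySem.Dict Int Bool :=
  if pvPassC (pvCell matrix r c) = true then
    let root := pvFindR parent (r * M + c)
    (st.1.insert root (st.1.getD root 0 + (if pvCell matrix r c = 'k' then 1 else 0)),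
     st.2.1.insert root (st.2.1.getD root 0 + (if pvCell matrix r c = 'v' then 1 else 0)),
     if pvBdry N M r c then st.2.2.insert root true else st.2.2)
  else st

def calc_survive_alt (N : Int) (M : Int) (matrix : List String) : List Int :=
  if N ≤ 0 ∨ M ≤ 0 then [0, 0] else
  let parent := (PySem.List.pyRange 0 N 1).foldl
    (fun par r => (PySem.List.pyRange 0 M 1).foldl
      (fun par c => pvUnite N M matrix par r c) par)
    (PySem.List.pyRange 0 (N * M) 1)
  let t := (PySem.List.pyRange 0 N 1).foldl
    (fun st r => (PySem.List.pyRange 0 M 1).foldl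
      (fun st c => pvTally N M matrix parent st r c) st)
    (PySem.Dict.empty, PySem.Dict.empty, PySem.Dict.empty)
  -- 'wolves[root]' is read as getD 0: the key is always present (sheep and wolves share keys)
  let tot := t.1.items.foldl
    (fun acc kv =>
      let w := t.2.1.getD kv.1 0
      if t.2.2.contains kv.1 then (acc.1 + kv.2, acc.2 + w)
      else if kv.2 > w then (acc.1 + kv.2, acc.2)
      else (acc.1, acc.2 + w))
    ((0 : Int), (0 : Int))
  [tot.1, tot.2]

-- ===== PRECONDITION & SPEC =====
-- Pre_ excludes exactly the inputs where Python A raises IndexError: when both ranges are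
-- nonempty, every row index below N must exist in matrix and each such row must have at
-- least M characters.
def Pre_calc_survive (N : Int) (M : Int) (matrix : List String) : Prop :=
  M ≤ 0 ∨ (N.toNat ≤ matrix.length ∧ ∀ row ∈ matrix.take N.toNat, M.toNat ≤ row.length)

instance (N : Int) (M : Int) (matrix : List String) : Decidable (Pre_calc_survive N M matrix) := by
  unfold Pre_calc_survive; infer_instance

def pvWitness_calc_survive : Int × Int × List String := (2, 2, ["vk", ".."])

def Spec_calc_survive (N : Int) (M : Int) (matrix : List String) (out : List Int) : Prop := out = calc_survive_alt N M matrix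
instance (N : Int) (M : Int) (matrix : List String) (out : List Int) : Decidable (Spec_calc_survive N M matrix out) := by unfold Spec_calc_survive; infer_instance

-- ===== CLAIM (what is proved, stated in full; the proofs are below) =====
def Claim_equal_calc_survive : Prop := ∀ (N : Int) (M : Int) (matrix : List String), Dom_calc_survive N M matrix → Pre_calc_survive N M matrix → Spec_calc_survive N M matrix (calc_survive N M matrix)

-- ===== LEMMAS AND PROOFS =====

-- abstract view of the grid state
def pvVS (g : List (List Bool)) : Int × Int → Prop := fun c => pvGet g c.1 c.2 = true

def pvShape (N M : Int) (g : List (List Bool)) : Prop :=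
  g.length = N.toNat ∧ ∀ row ∈ g, row.length = M.toNat

def pvPass (N M : Int) (matrix : List String) (p : Int × Int) : Prop :=
  0 ≤ p.1 ∧ p.1 < N ∧ 0 ≤ p.2 ∧ p.2 < M ∧ pvPassC (pvCell matrix p.1 p.2) = true

def pvNbrs (p : Int × Int) : List (Int × Int) :=
  [(p.1 + 1, p.2), (p.1 - 1, p.2), (p.1, p.2 + 1), (p.1, p.2 - 1)]

def pvEdge (N M : Int) (matrix : List String) (V : Int × Int → Prop) (a b : Int × Int) : Prop :=
  b ∈ pvNbrs a ∧ pvPass N M matrix b ∧ ¬ V b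

def pvRV (N M : Int) (matrix : List String) (q : List (Int × Int)) (V : Int × Int → Prop) :
    Int × Int → Prop :=
  fun c => V c ∨ ∃ s ∈ q, Relation.ReflTransGen (pvEdge N M matrix V) s c

-- grid counters
def pvCntRow (q : Int → Bool) : List Bool → Int → Nat
  | [], _ => 0
  | b :: row, c => (if b && q c then 1 else 0) + pvCntRow q row (c + 1)

def pvCntG (p : Int → Int → Bool) : List (List Bool) → Int → Nat
  | [], _ => 0
  | row :: g, r => pvCntRow (p r) row 0 + pvCntG p g (r + 1)

def pvCnt (p : Int → Int → Bool) (g : List (List Bool)) : Nat := pvCntG p g 0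

def pvF (g : List (List Bool)) : Nat := (g.map (fun row => row.count false)).sum

def pvKP (matrix : List String) : Int → Int → Bool := fun r c => pvCell matrix r c == 'k'
def pvVP (matrix : List String) : Int → Int → Bool := fun r c => pvCell matrix r c == 'v'
def pvBP (N M : Int) : Int → Int → Bool := fun r c => pvBdry N M r c


-- ---- basic grid lemmas ----

lemma pvShape_row (N M : Int) {g : List (List Bool)} (hs : pvShape N M g) {i : Nat}
    (hi : i < g.length) : (g.getD i []).length = M.toNat := by
  have h : g.getD i [] = g[i] := by
    rw [List.getD_eq_getElem?_getD, List.getElem?_eq_getElem hi]; rfl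
  rw [h]; exact hs.2 _ (List.getElem_mem hi)

lemma pvShape_set (N M : Int) {g : List (List Bool)} (h : pvShape N M g) (r c : Int) :
    pvShape N M (pvSet g r c) := by
  obtain ⟨h1, h2⟩ := h
  refine ⟨by simpa [pvSet, pvSetN] using h1, ?_⟩
  intro row hrow
  obtain ⟨k, hk, rfl⟩ := List.mem_iff_getElem.mp hrow
  unfold pvSet pvSetN at hk ⊢
  rw [List.getElem_modify]
  have hk' : k < g.length := by simpa using hk
  split
  · rw [List.length_set]; exact h2 _ (List.getElem_mem hk')
  · exact h2 _ (List.getElem_mem hk')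

lemma pvGetN_set {g : List (List Bool)} {i j : Nat} (hi : i < g.length)
    (hj : j < (g.getD i []).length) (i' j' : Nat) :
    pvGetN (pvSetN g i j) i' j' = ((decide (i' = i) && decide (j' = j)) || pvGetN g i' j') := by
  unfold pvGetN pvSetN
  simp only [List.getD_eq_getElem?_getD, List.getElem?_modify]
  cases h : g[i']? with
  | none =>
    have hlen : g.length ≤ i' := List.getElem?_eq_none_iff.mp h
    have hne : i' ≠ i := by omega
    simp [hne]
  | some row =>
    by_cases hii : i = i'
    · subst hii
      have hrow : g.getD i [] = row := by rw [List.getD_eq_getElem?_getD, h]; rfl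
      simp only [if_true, Option.map_eq_map, Option.map_some, Option.getD_some, decide_true,
        Bool.true_and, List.getElem?_set]
      by_cases hjj : j = j'
      · subst hjj; simp [hrow ▸ hj]
      · simp [hjj, Ne.symm hjj]
    · simp [hii, Ne.symm hii]

lemma pvVS_set (N M : Int) {g : List (List Bool)} (hs : pvShape N M g) {b : Int × Int}
    (h1 : 0 ≤ b.1) (h2 : b.1 < N) (h3 : 0 ≤ b.2) (h4 : b.2 < M) (c : Int × Int) :
    pvVS (pvSet g b.1 b.2) c ↔ (c = b ∨ pvVS g c) := by
  have hi : b.1.toNat < g.length := by rw [hs.1]; omega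
  have hj : b.2.toNat < (g.getD b.1.toNat []).length := by rw [pvShape_row N M hs hi]; omega
  unfold pvVS pvGet pvSet
  by_cases hc : 0 ≤ c.1 ∧ 0 ≤ c.2
  · rw [if_pos hc, if_pos hc, pvGetN_set hi hj]
    constructor
    · intro h
      rcases Bool.or_eq_true_iff.mp h with h | h
      · obtain ⟨ha, hb⟩ := Bool.and_eq_true_iff.mp h
        have e1 := of_decide_eq_true ha
        have e2 := of_decide_eq_true hb
        exact Or.inl (Prod.ext (by omega) (by omega))
      · exact Or.inr h
    · rintro (rfl | h)
      · simp
      · simp [h]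
  · rw [if_neg hc, if_neg hc]
    constructor
    · intro h; exact absurd h (by simp)
    · rintro (rfl | h)
      · exact absurd ⟨h1, h3⟩ hc
      · exact h

lemma pvVS_set_fun (N M : Int) {g : List (List Bool)} (hs : pvShape N M g) {b : Int × Int}
    (h1 : 0 ≤ b.1) (h2 : b.1 < N) (h3 : 0 ≤ b.2) (h4 : b.2 < M) :
    pvVS (pvSet g b.1 b.2) = fun c => c = b ∨ pvVS g c := by
  funext c; exact propext (pvVS_set N M hs h1 h2 h3 h4 c)

-- ---- counter lemmas ----

lemma pvCntRow_set (q : Int → Bool) :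
    ∀ (row : List Bool) (j : Nat) (c0 : Int), j < row.length → row.getD j false = false →
      pvCntRow q (row.set j true) c0 = pvCntRow q row c0 + (if q (c0 + j) then 1 else 0) := by
  intro row
  induction row with
  | nil => intro j c0 h; simp at h
  | cons b row ih =>
    intro j c0 hj hb
    cases j with
    | zero =>
      have hb0 : b = false := by simpa using hb
      subst hb0
      simp only [List.set_cons_zero, pvCntRow, Nat.cast_zero, add_zero, Bool.false_and,
        Bool.true_and, Bool.false_eq_true, if_false]
      omega
    | succ j' =>
      have hj' : j' < row.length := by simpa using hj
      have hb' : row.getD j' false = false := by simpa using hb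
      simp only [List.set_cons_succ, pvCntRow]
      rw [ih j' (c0 + 1) hj' hb']
      have harg : c0 + 1 + (j' : Int) = c0 + ((j' + 1 : Nat) : Int) := by push_cast; ring
      rw [harg]
      omega

lemma pvCntG_set (p : Int → Int → Bool) :
    ∀ (g : List (List Bool)) (i j : Nat) (r0 : Int), i < g.length →
      j < (g.getD i []).length → pvGetN g i j = false →
      pvCntG p (pvSetN g i j) r0 = pvCntG p g r0 + (if p (r0 + i) j then 1 else 0) := by
  intro g
  induction g with
  | nil => intro i j r0 h; simp at h
  | cons row g ih =>
    intro i j r0 hi hj hv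
    cases i with
    | zero =>
      have hj0 : j < row.length := by simpa using hj
      have hv0 : row.getD j false = false := by unfold pvGetN at hv; simpa using hv
      simp only [pvSetN, List.modify_zero_cons, pvCntG]
      rw [pvCntRow_set (p r0) row j 0 hj0 hv0]
      simp only [Nat.cast_zero, add_zero, zero_add]
      omega
    | succ i' =>
      have hi' : i' < g.length := by simpa using hi
      have hj' : j < (g.getD i' []).length := by simpa using hj
      have hv' : pvGetN g i' j = false := by unfold pvGetN at hv ⊢; simpa using hv
      simp only [pvSetN, List.modify_succ_cons, pvCntG]
      rw [show pvCntG p (g.modify i' fun row => row.set j true) (r0 + 1)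
            = pvCntG p (pvSetN g i' j) (r0 + 1) from rfl]
      rw [ih i' j (r0 + 1) hi' hj' hv']
      have harg : r0 + 1 + (i' : Int) = r0 + ((i' + 1 : Nat) : Int) := by push_cast; ring
      rw [harg]
      omega

lemma pvCnt_set (p : Int → Int → Bool) (N M : Int) {g : List (List Bool)} (hs : pvShape N M g)
    {b : Int × Int} (h1 : 0 ≤ b.1) (h2 : b.1 < N) (h3 : 0 ≤ b.2) (h4 : b.2 < M)
    (hv : pvGet g b.1 b.2 = false) :
    pvCnt p (pvSet g b.1 b.2) = pvCnt p g + (if p b.1 b.2 then 1 else 0) := by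
  have hi : b.1.toNat < g.length := by rw [hs.1]; omega
  have hj : b.2.toNat < (g.getD b.1.toNat []).length := by rw [pvShape_row N M hs hi]; omega
  have hv' : pvGetN g b.1.toNat b.2.toNat = false := by
    unfold pvGet at hv; rw [if_pos ⟨h1, h3⟩] at hv; exact hv
  unfold pvCnt pvSet
  rw [pvCntG_set p g b.1.toNat b.2.toNat 0 hi hj hv']
  have e1 : (0 : Int) + (b.1.toNat : Int) = b.1 := by omega
  have e2 : ((b.2.toNat : Nat) : Int) = b.2 := by omega
  rw [e1, e2]

lemma pvFRow_set :
    ∀ (row : List Bool) (j : Nat), j < row.length → row.getD j false = false →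
      (row.set j true).count false + 1 = row.count false := by
  intro row
  induction row with
  | nil => intro j h; simp at h
  | cons b row ih =>
    intro j hj hb
    cases j with
    | zero =>
      have hb0 : b = false := by simpa using hb
      subst hb0
      simp
    | succ j' =>
      have hj' : j' < row.length := by simpa using hj
      have hb' : row.getD j' false = false := by simpa using hb
      simp only [List.set_cons_succ, List.count_cons]
      have := ih j' hj' hb'
      omega

lemma pvF_setN :
    ∀ (g : List (List Bool)) (i j : Nat), i < g.length → j < (g.getD i []).length →
      pvGetN g i j = false → pvF (pvSetN g i j) + 1 = pvF g := by
  intro g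
  induction g with
  | nil => intro i j h; simp at h
  | cons row g ih =>
    intro i j hi hj hv
    cases i with
    | zero =>
      have hj0 : j < row.length := by simpa using hj
      have hv0 : row.getD j false = false := by
        unfold pvGetN at hv; simpa using hv
      simp only [pvSetN, List.modify_zero_cons, pvF, List.map_cons, List.sum_cons]
      have := pvFRow_set row j hj0 hv0
      omega
    | succ i' =>
      have hi' : i' < g.length := by simpa using hi
      have hj' : j < (g.getD i' []).length := by simpa using hj
      have hv' : pvGetN g i' j = false := by unfold pvGetN at hv ⊢; simpa using hv
      simp only [pvSetN, List.modify_succ_cons, pvF, List.map_cons, List.sum_cons]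
      have := ih i' j hi' hj' hv'
      unfold pvF pvSetN at this
      omega

lemma pvF_set (N M : Int) {g : List (List Bool)} (hs : pvShape N M g)
    {b : Int × Int} (h1 : 0 ≤ b.1) (h2 : b.1 < N) (h3 : 0 ≤ b.2) (h4 : b.2 < M)
    (hv : pvGet g b.1 b.2 = false) :
    pvF (pvSet g b.1 b.2) + 1 = pvF g := by
  have hi : b.1.toNat < g.length := by rw [hs.1]; omega
  have hj : b.2.toNat < (g.getD b.1.toNat []).length := by rw [pvShape_row N M hs hi]; omega
  have hv' : pvGetN g b.1.toNat b.2.toNat = false := by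
    unfold pvGet at hv; rw [if_pos ⟨h1, h3⟩] at hv; exact hv
  exact pvF_setN g b.1.toNat b.2.toNat hi hj hv'

lemma pvF_le_aux (m : Nat) :
    ∀ (g : List (List Bool)), (∀ row ∈ g, row.length = m) → pvF g ≤ g.length * m := by
  intro g
  induction g with
  | nil => simp [pvF]
  | cons row g ih =>
    intro h2
    simp only [pvF, List.map_cons, List.sum_cons, List.length_cons]
    have hr : row.count false ≤ m := by
      rw [← h2 row List.mem_cons_self]
      exact List.count_le_length
    have := ih (fun r hr => h2 r (List.mem_cons_of_mem _ hr))
    unfold pvF at this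
    calc row.count false + (g.map (fun row => row.count false)).sum
        ≤ m + g.length * m := Nat.add_le_add hr this
      _ = (g.length + 1) * m := by ring

lemma pvF_le (N M : Int) {g : List (List Bool)} (hs : pvShape N M g) :
    pvF g ≤ N.toNat * M.toNat := by
  have := pvF_le_aux M.toNat g hs.2
  rw [hs.1] at this
  exact this

-- ---- reachability lemmas ----

lemma pvEdge_mono (N M : Int) (matrix : List String) {V V' : Int × Int → Prop}
    (h : ∀ c, V c → V' c) {a b : Int × Int} (he : pvEdge N M matrix V' a b) :
    pvEdge N M matrix V a b :=
  ⟨he.1, he.2.1, fun hb => he.2.2 (h b hb)⟩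

lemma pvSurgery (N M : Int) (matrix : List String) {V V' : Int × Int → Prop}
    (_hsub : ∀ c, V c → V' c) {s c : Int × Int}
    (h : Relation.ReflTransGen (pvEdge N M matrix V) s c) (hc : ¬ V' c) :
    ∃ s', (s' = s ∨ (V' s' ∧ ¬ V s')) ∧ Relation.ReflTransGen (pvEdge N M matrix V') s' c := by
  induction h with
  | refl => exact ⟨s, Or.inl rfl, Relation.ReflTransGen.refl⟩
  | @tail b c hsb hbc ih =>
    by_cases hb : V' b
    · by_cases hbV : V b
      · have hbs : b = s := by
          rcases (Relation.ReflTransGen.cases_tail hsb) with h | ⟨d, _, hdb⟩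
          · exact h
          · exact absurd hbV hdb.2.2
        subst hbs
        exact ⟨b, Or.inl rfl,
          Relation.ReflTransGen.single ⟨hbc.1, hbc.2.1, hc⟩⟩
      · exact ⟨b, Or.inr ⟨hb, hbV⟩,
          Relation.ReflTransGen.single ⟨hbc.1, hbc.2.1, hc⟩⟩
    · obtain ⟨s', hs', hpath⟩ := ih hb
      exact ⟨s', hs', hpath.tail ⟨hbc.1, hbc.2.1, hc⟩⟩

lemma pvRV_nil (N M : Int) (matrix : List String) (V : Int × Int → Prop) :
    pvRV N M matrix [] V = V := by
  funext c
  unfold pvRV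
  simp

lemma pvRV_push (N M : Int) (matrix : List String) {u b : Int × Int} {q : List (Int × Int)}
    {V : Int × Int → Prop} (hnb : b ∈ pvNbrs u) (hp : pvPass N M matrix b) (hbV : ¬ V b) :
    pvRV N M matrix (u :: (q ++ [b])) (fun c => c = b ∨ V c) = pvRV N M matrix (u :: q) V := by
  funext c
  unfold pvRV
  apply propext
  constructor
  · rintro (hv | ⟨s, hs, hp'⟩)
    · rcases hv with rfl | hv
      · exact Or.inr ⟨u, List.mem_cons_self,
          Relation.ReflTransGen.single ⟨hnb, hp, hbV⟩⟩
      · exact Or.inl hv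
    · have hmono : Relation.ReflTransGen (pvEdge N M matrix V) s c :=
        hp'.mono (fun a b => pvEdge_mono N M matrix (fun c hc => Or.inr hc))
      rcases List.mem_cons.mp hs with rfl | hs
      · exact Or.inr ⟨s, List.mem_cons_self, hmono⟩
      · rcases List.mem_append.mp hs with hs | hs
        · exact Or.inr ⟨s, List.mem_cons_of_mem _ hs, hmono⟩
        · -- s = b : prefix the edge u → b
          have hsb : s = b := by simpa using hs
          subst hsb
          exact Or.inr ⟨u, List.mem_cons_self,
            Relation.ReflTransGen.head ⟨hnb, hp, hbV⟩ hmono⟩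
  · rintro (hv | ⟨s, hs, hp'⟩)
    · exact Or.inl (Or.inr hv)
    · by_cases hc : c = b ∨ V c
      · exact Or.inl hc
      · obtain ⟨s', hs', hpath⟩ := pvSurgery N M matrix
          (fun x hx => (Or.inr hx : x = b ∨ V x)) hp' hc
        rcases hs' with rfl | ⟨hs'1, hs'2⟩
        · rcases List.mem_cons.mp hs with rfl | hs
          · exact Or.inr ⟨s', List.mem_cons_self, hpath⟩
          · exact Or.inr ⟨s', List.mem_cons_of_mem _ (List.mem_append_left _ hs), hpath⟩
        · rcases hs'1 with rfl | hv'
          · exact Or.inr ⟨s', List.mem_cons_of_mem _ (List.mem_append_right _ (by simp)), hpath⟩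
          · exact absurd hv' hs'2

lemma pvRV_drop (N M : Int) (matrix : List String) {u : Int × Int} {q : List (Int × Int)}
    {V : Int × Int → Prop} (hu : V u)
    (hnb : ∀ b ∈ pvNbrs u, ¬ (pvPass N M matrix b ∧ ¬ V b)) :
    pvRV N M matrix (u :: q) V = pvRV N M matrix q V := by
  funext c
  unfold pvRV
  apply propext
  constructor
  · rintro (hv | ⟨s, hs, hp'⟩)
    · exact Or.inl hv
    · rcases List.mem_cons.mp hs with rfl | hs
      · rcases (Relation.ReflTransGen.cases_head hp') with rfl | ⟨x, hx, _⟩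
        · exact Or.inl hu
        · exact absurd ⟨hx.2.1, hx.2.2⟩ (hnb x hx.1)
      · exact Or.inr ⟨s, hs, hp'⟩
  · rintro (hv | ⟨s, hs, hp'⟩)
    · exact Or.inl hv
    · exact Or.inr ⟨s, List.mem_cons_of_mem _ hs, hp'⟩

-- ---- the four-neighbour fold, A side ----

lemma pvFoldA_spec (N M : Int) (matrix : List String) (u : Int × Int) :
    ∀ (dirs : List (Int × Int)) (q : List (Int × Int)) (vis : List (List Bool)) (s w : Int)
      (fd : Bool),
    (∀ d ∈ dirs, (u.1 + d.1, u.2 + d.2) ∈ pvNbrs u) →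
    pvShape N M vis → (∀ x ∈ q, pvVS vis x) →
    ∃ q' vis',
      List.foldl (pvStepA N M matrix u) (q, vis, s, w, fd) dirs
        = (q', vis',
           s + ((pvCnt (pvKP matrix) vis' : Int) - (pvCnt (pvKP matrix) vis : Int)),
           w + ((pvCnt (pvVP matrix) vis' : Int) - (pvCnt (pvVP matrix) vis : Int)),
           fd && (pvCnt (pvBP N M) vis' == pvCnt (pvBP N M) vis))
      ∧ pvShape N M vis' ∧ (∀ x ∈ q', pvVS vis' x) ∧ (∀ c, pvVS vis c → pvVS vis' c)
      ∧ pvRV N M matrix (u :: q') (pvVS vis') = pvRV N M matrix (u :: q) (pvVS vis)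
      ∧ pvCnt (pvKP matrix) vis ≤ pvCnt (pvKP matrix) vis'
      ∧ pvCnt (pvVP matrix) vis ≤ pvCnt (pvVP matrix) vis'
      ∧ pvCnt (pvBP N M) vis ≤ pvCnt (pvBP N M) vis'
      ∧ 2 * pvF vis' + q'.length ≤ 2 * pvF vis + q.length
      ∧ (∀ d ∈ dirs,
          ¬ (pvPass N M matrix (u.1 + d.1, u.2 + d.2) ∧
             ¬ pvVS vis' (u.1 + d.1, u.2 + d.2))) := by
  intro dirs
  induction dirs with
  | nil =>
    intro q vis s w fd _ hs hq
    refine ⟨q, vis, by simp, hs, hq, fun c h => h, rfl, le_refl _, le_refl _, le_refl _,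
      le_refl _, by simp⟩
  | cons d dirs ih =>
    intro q vis s w fd hdir hs hq
    simp only [List.foldl_cons]
    by_cases hg : 0 ≤ u.1 + d.1 ∧ u.1 + d.1 < N ∧ 0 ≤ u.2 + d.2 ∧ u.2 + d.2 < M ∧
        pvPassC (pvCell matrix (u.1 + d.1) (u.2 + d.2)) = true ∧
        pvGet vis (u.1 + d.1) (u.2 + d.2) = false
    · obtain ⟨hg1, hg2, hg3, hg4, hg5, hg6⟩ := hg
      have hstep : pvStepA N M matrix u (q, vis, s, w, fd) d =
          (q ++ [(u.1 + d.1, u.2 + d.2)], pvSet vis (u.1 + d.1) (u.2 + d.2),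
           if pvCell matrix (u.1 + d.1) (u.2 + d.2) = 'k' then s + 1 else s,
           if pvCell matrix (u.1 + d.1) (u.2 + d.2) = 'k' then w
             else if pvCell matrix (u.1 + d.1) (u.2 + d.2) = 'v' then w + 1 else w,
           if pvBdry N M (u.1 + d.1) (u.2 + d.2) then false else fd) := by
        dsimp only [pvStepA]
        rw [if_pos ⟨hg1, hg2, hg3, hg4, hg5, hg6⟩]
      rw [hstep]
      have hVS1 := pvVS_set_fun N M hs (b := (u.1 + d.1, u.2 + d.2)) hg1 hg2 hg3 hg4
      have hkc := pvCnt_set (pvKP matrix) N M hs (b := (u.1 + d.1, u.2 + d.2)) hg1 hg2 hg3 hg4 hg6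
      have hvc := pvCnt_set (pvVP matrix) N M hs (b := (u.1 + d.1, u.2 + d.2)) hg1 hg2 hg3 hg4 hg6
      have hbc := pvCnt_set (pvBP N M) N M hs (b := (u.1 + d.1, u.2 + d.2)) hg1 hg2 hg3 hg4 hg6
      have hfc := pvF_set N M hs (b := (u.1 + d.1, u.2 + d.2)) hg1 hg2 hg3 hg4 hg6
      dsimp only at hkc hvc hbc hfc
      have hq1 : ∀ x ∈ q ++ [(u.1 + d.1, u.2 + d.2)],
          pvVS (pvSet vis (u.1 + d.1) (u.2 + d.2)) x := by
        intro x hx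
        rw [hVS1]
        rcases List.mem_append.mp hx with hx | hx
        · exact Or.inr (hq x hx)
        · exact Or.inl (by simpa using hx)
      obtain ⟨q', vis', heq, hs', hq', hmono', hrv, hk', hv', hb', hmu, hcov⟩ :=
        ih (q ++ [(u.1 + d.1, u.2 + d.2)]) (pvSet vis (u.1 + d.1) (u.2 + d.2)) _ _ _
          (fun d' hd' => hdir d' (List.mem_cons_of_mem _ hd'))
          (pvShape_set N M hs _ _) hq1
      have hbmem : ((u.1 + d.1, u.2 + d.2) : Int × Int) ∈ pvNbrs u := hdir d List.mem_cons_self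
      have hbpass : pvPass N M matrix (u.1 + d.1, u.2 + d.2) := ⟨hg1, hg2, hg3, hg4, hg5⟩
      have hbnv : ¬ pvVS vis (u.1 + d.1, u.2 + d.2) := by
        unfold pvVS; simp [hg6]
      refine ⟨q', vis', ?_, hs', hq', ?_, ?_, ?_, ?_, ?_, ?_, ?_⟩
      · rw [heq]
        simp only [Prod.mk.injEq]
        refine ⟨trivial, trivial, ?_, ?_, ?_⟩
        · by_cases hk0 : pvCell matrix (u.1 + d.1) (u.2 + d.2) = 'k'
          · rw [if_pos hk0, hkc, if_pos (by simp [pvKP, hk0])]; push_cast; ring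
          · rw [if_neg hk0, hkc, if_neg (by simp [pvKP, hk0])]; push_cast; ring
        · by_cases hk0 : pvCell matrix (u.1 + d.1) (u.2 + d.2) = 'k'
          · rw [if_pos hk0, hvc, if_neg (by simp [pvVP, hk0])]; push_cast; ring
          · rw [if_neg hk0]
            by_cases hv0 : pvCell matrix (u.1 + d.1) (u.2 + d.2) = 'v'
            · rw [if_pos hv0, hvc, if_pos (by simp [pvVP, hv0])]; push_cast; ring
            · rw [if_neg hv0, hvc, if_neg (by simp [pvVP, hv0])]; push_cast; ring
        · by_cases hb0 : pvBdry N M (u.1 + d.1) (u.2 + d.2) = true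
          · rw [if_pos hb0]
            have hstepb : pvCnt (pvBP N M) (pvSet vis (u.1 + d.1) (u.2 + d.2))
                = pvCnt (pvBP N M) vis + 1 := by
              rw [hbc, if_pos (show pvBP N M (u.1 + d.1) (u.2 + d.2) = true from hb0)]
            rw [hstepb] at hb'
            have hne : (pvCnt (pvBP N M) vis' == pvCnt (pvBP N M) vis) = false := by
              rw [beq_eq_false_iff_ne]; omega
            simp [hne]
          · rw [if_neg hb0]
            have hstepb : pvCnt (pvBP N M) (pvSet vis (u.1 + d.1) (u.2 + d.2))
                = pvCnt (pvBP N M) vis := by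
              rw [hbc, if_neg (show ¬ pvBP N M (u.1 + d.1) (u.2 + d.2) = true from hb0),
                add_zero]
            rw [hstepb]
      · intro c hc
        exact hmono' c (by rw [hVS1]; exact Or.inr hc)
      · rw [hrv, hVS1, pvRV_push N M matrix hbmem hbpass hbnv]
      · rw [hkc] at hk'; omega
      · rw [hvc] at hv'; omega
      · rw [hbc] at hb'; omega
      · rw [List.length_append] at hmu
        simp only [List.length_cons, List.length_nil] at hmu ⊢
        omega
      · intro d' hd'
        rcases List.mem_cons.mp hd' with rfl | hd'
        · rintro ⟨-, hnv⟩
          exact hnv (hmono' _ (by rw [hVS1]; exact Or.inl rfl))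
        · exact hcov d' hd'
    · have hstep : pvStepA N M matrix u (q, vis, s, w, fd) d = (q, vis, s, w, fd) := by
        dsimp only [pvStepA]
        rw [if_neg hg]
      rw [hstep]
      obtain ⟨q', vis', heq, hs', hq', hmono, hrv, hk, hv, hb, hmu, hcov⟩ :=
        ih q vis s w fd (fun d' hd' => hdir d' (List.mem_cons_of_mem _ hd')) hs hq
      refine ⟨q', vis', heq, hs', hq', hmono, hrv, hk, hv, hb, hmu, ?_⟩
      intro d' hd'
      rcases List.mem_cons.mp hd' with rfl | hd'
      · rintro ⟨hpass, hnvis⟩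
        obtain ⟨hp1, hp2, hp3, hp4, hp5⟩ := hpass
        apply hnvis
        apply hmono
        unfold pvVS
        have hnotf : ¬ (pvGet vis (u.1 + d'.1) (u.2 + d'.2) = false) := fun hf =>
          hg ⟨hp1, hp2, hp3, hp4, hp5, hf⟩
        simpa using hnotf
      · exact hcov d' hd'

-- ---- the while loop, A side ----

lemma pvBeqChain {a b c : Nat} (h1 : a ≤ b) (h2 : b ≤ c) (fd : Bool) :
    ((fd && (b == a)) && (c == b)) = (fd && (c == a)) := by
  by_cases e1 : b = a
  · subst e1
    rw [beq_self_eq_true, Bool.and_true]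
  · have hca : c ≠ a := by omega
    rw [beq_eq_false_iff_ne.mpr e1, beq_eq_false_iff_ne.mpr hca]
    simp

lemma pvDirsA_mem (u : Int × Int) :
    ∀ d ∈ [((1 : Int), (0 : Int)), (0, -1), (-1, 0), (0, 1)],
      (u.1 + d.1, u.2 + d.2) ∈ pvNbrs u := by
  intro d hd
  fin_cases hd <;> simp [pvNbrs] <;> omega

lemma pvCovA (u : Int × Int) (P : Int × Int → Prop)
    (h : ∀ d ∈ [((1 : Int), (0 : Int)), (0, -1), (-1, 0), (0, 1)], P (u.1 + d.1, u.2 + d.2)) :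
    ∀ b ∈ pvNbrs u, P b := by
  intro b hb
  simp only [pvNbrs, List.mem_cons, List.not_mem_nil, or_false] at hb
  rcases hb with rfl | rfl | rfl | rfl
  · simpa using h (1, 0) (by simp)
  · simpa [sub_eq_add_neg] using h (-1, 0) (by simp)
  · simpa using h (0, 1) (by simp)
  · simpa [sub_eq_add_neg] using h (0, -1) (by simp)

lemma pvLoopA_spec (N M : Int) (matrix : List String) :
    ∀ (f : Nat) (q : List (Int × Int)) (vis : List (List Bool)) (s w : Int) (fd : Bool),
    pvShape N M vis → (∀ x ∈ q, pvVS vis x) → 2 * pvF vis + q.length ≤ f →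
    ∃ vis',
      pvLoopA N M matrix f q vis s w fd
        = (vis', s + ((pvCnt (pvKP matrix) vis' : Int) - (pvCnt (pvKP matrix) vis : Int)),
           w + ((pvCnt (pvVP matrix) vis' : Int) - (pvCnt (pvVP matrix) vis : Int)),
           fd && (pvCnt (pvBP N M) vis' == pvCnt (pvBP N M) vis))
      ∧ pvShape N M vis' ∧ pvVS vis' = pvRV N M matrix q (pvVS vis)
      ∧ pvCnt (pvKP matrix) vis ≤ pvCnt (pvKP matrix) vis'
      ∧ pvCnt (pvVP matrix) vis ≤ pvCnt (pvVP matrix) vis'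
      ∧ pvCnt (pvBP N M) vis ≤ pvCnt (pvBP N M) vis' := by
  intro f
  induction f with
  | zero =>
    intro q vis s w fd hs hq hf
    have hq0 : q = [] := List.length_eq_zero_iff.mp (by omega)
    subst hq0
    exact ⟨vis, by simp [pvLoopA], hs, (pvRV_nil N M matrix (pvVS vis)).symm,
      le_refl _, le_refl _, le_refl _⟩
  | succ f ih =>
    intro q vis s w fd hs hq hf
    cases q with
    | nil =>
      exact ⟨vis, by simp [pvLoopA], hs, (pvRV_nil N M matrix (pvVS vis)).symm,
        le_refl _, le_refl _, le_refl _⟩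
    | cons u q =>
      obtain ⟨q', vis1, heq, hs1, hq1, hmono1, hrv1, hk1, hv1, hb1, hmu1, hcov1⟩ :=
        pvFoldA_spec N M matrix u [((1 : Int), (0 : Int)), (0, -1), (-1, 0), (0, 1)]
          q vis s w fd (pvDirsA_mem u) hs (fun x hx => hq x (List.mem_cons_of_mem _ hx))
      have hstep : pvLoopA N M matrix (f + 1) (u :: q) vis s w fd
          = pvLoopA N M matrix f q' vis1
              (s + ((pvCnt (pvKP matrix) vis1 : Int) - (pvCnt (pvKP matrix) vis : Int)))
              (w + ((pvCnt (pvVP matrix) vis1 : Int) - (pvCnt (pvVP matrix) vis : Int)))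
              (fd && (pvCnt (pvBP N M) vis1 == pvCnt (pvBP N M) vis)) := by
        simp only [pvLoopA]
        rw [heq]
      rw [hstep]
      have hfuel : 2 * pvF vis1 + q'.length ≤ f := by
        simp only [List.length_cons] at hf
        omega
      obtain ⟨vis', heq', hs', hrv', hk', hv', hb'⟩ :=
        ih q' vis1 _ _ _ hs1 hq1 hfuel
      refine ⟨vis', ?_, hs', ?_, by omega, by omega, by omega⟩
      · rw [heq']
        simp only [Prod.mk.injEq]
        refine ⟨trivial, by ring, by ring, pvBeqChain hb1 hb' fd⟩
      · -- drop u : every neighbour of u is impassable or already visited in vis1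
        rw [hrv', ← pvRV_drop N M matrix (V := pvVS vis1)
            (hmono1 u (hq u List.mem_cons_self))
            (pvCovA u _ (fun d hd => hcov1 d hd)), hrv1]


-- ---- the grid as a list of cells; shared loop shape ----

def pvCells (N M : Int) : List (Int × Int) :=
  (PySem.List.pyRange 0 N 1).flatMap (fun r => (PySem.List.pyRange 0 M 1).map (fun c => (r, c)))

lemma pvMem_cells (N M : Int) (p : Int × Int) :
    p ∈ pvCells N M ↔ 0 ≤ p.1 ∧ p.1 < N ∧ 0 ≤ p.2 ∧ p.2 < M := by
  unfold pvCells
  simp only [List.mem_flatMap, List.mem_map, PySem.List.mem_pyRange_one]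
  constructor
  · rintro ⟨r, hr, c, hc, rfl⟩
    exact ⟨hr.1, hr.2, hc.1, hc.2⟩
  · rintro ⟨h1, h2, h3, h4⟩
    exact ⟨p.1, ⟨h1, h2⟩, p.2, ⟨h3, h4⟩, rfl⟩

lemma pvFoldl_cells {σ : Type} (N M : Int) (f : σ → Int → Int → σ) (init : σ) :
    (PySem.List.pyRange 0 N 1).foldl
      (fun st r => (PySem.List.pyRange 0 M 1).foldl (fun st c => f st r c) st) init
    = (pvCells N M).foldl (fun st p => f st p.1 p.2) init := by
  unfold pvCells
  rw [List.foldl_flatMap]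
  simp [List.foldl_map]

-- ---- semantic connectivity ----

def pvStepR (N M : Int) (matrix : List String) (a b : Int × Int) : Prop :=
  pvPass N M matrix a ∧ pvPass N M matrix b ∧ b ∈ pvNbrs a

def pvReach (N M : Int) (matrix : List String) : Int × Int → Int × Int → Prop :=
  Relation.ReflTransGen (pvStepR N M matrix)

lemma pvNbrs_symm (a b : Int × Int) : b ∈ pvNbrs a ↔ a ∈ pvNbrs b := by
  simp only [pvNbrs, List.mem_cons, List.not_mem_nil, or_false, Prod.ext_iff]
  obtain ⟨a1, a2⟩ := a
  obtain ⟨b1, b2⟩ := b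
  simp only
  omega

lemma pvStepR_symm (N M : Int) (matrix : List String) : Symmetric (pvStepR N M matrix) :=
  fun _ _ h => ⟨h.2.1, h.1, (pvNbrs_symm _ _).mpr h.2.2⟩

lemma pvReach_symm (N M : Int) (matrix : List String) {a b : Int × Int}
    (h : pvReach N M matrix a b) : pvReach N M matrix b a :=
  Relation.ReflTransGen.symmetric (pvStepR_symm N M matrix) h

lemma pvReach_pass (N M : Int) (matrix : List String) {p q : Int × Int}
    (hp : pvPass N M matrix p) (h : pvReach N M matrix p q) : pvPass N M matrix q := by
  induction h with
  | refl => exact hp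
  | tail _ hbc _ => exact hbc.2.1

-- a component reached from a fresh seed avoids a Step-closed visited set
lemma pvReach_avoid (N M : Int) (matrix : List String) {V : Int × Int → Prop} {p : Int × Int}
    (Vcl : ∀ a b, V a → pvStepR N M matrix a b → V b) (hnp : ¬ V p) :
    ∀ q, pvReach N M matrix p q → ¬ V q := by
  intro q hq
  induction hq with
  | refl => exact hnp
  | tail hab hbc ih =>
    intro hVc
    exact ih (Vcl _ _ hVc (pvStepR_symm N M matrix hbc))

-- flooding from a fresh passable seed (already marked) over a Step-closed visited set
-- marks exactly the seed's connected component
lemma pvRV_reach (N M : Int) (matrix : List String) {V : Int × Int → Prop} {p : Int × Int}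
    (Vcl : ∀ a b, V a → pvStepR N M matrix a b → V b)
    (hp : pvPass N M matrix p) (hnp : ¬ V p) :
    pvRV N M matrix [p] (fun c => c = p ∨ V c) = fun q => V q ∨ pvReach N M matrix p q := by
  have havoid := pvReach_avoid N M matrix Vcl hnp
  funext q
  unfold pvRV
  apply propext
  constructor
  · rintro ((rfl | hv) | ⟨s, hs, hpath⟩)
    · exact Or.inr Relation.ReflTransGen.refl
    · exact Or.inl hv
    · have hsp : s = p := by simpa using hs
      subst hsp
      refine Or.inr ?_
      clear hs
      induction hpath with
      | refl => exact Relation.ReflTransGen.refl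
      | @tail b c hsb hbc ih =>
        have hpassb : pvPass N M matrix b := pvReach_pass N M matrix hp ih
        exact ih.tail ⟨hpassb, hbc.2.1, hbc.1⟩
  · rintro (hv | hreach)
    · exact Or.inl (Or.inr hv)
    · by_cases hqp : q = p
      · exact Or.inl (Or.inl hqp)
      · refine Or.inr ⟨p, List.mem_cons_self, ?_⟩
        -- build an edge path by induction, re-splitting at p
        clear hqp
        induction hreach with
        | refl => exact Relation.ReflTransGen.refl
        | @tail b c hsb hbc ih =>
          by_cases hcp : c = p
          · subst hcp; exact Relation.ReflTransGen.refl
          · exact ih.tail ⟨hbc.2.2, hbc.2.1, fun h => by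
              rcases h with rfl | h
              · exact hcp rfl
              · exact havoid c (hsb.tail hbc) h⟩

-- ---- counting bridges ----

lemma pvCountP_or {α : Type} (a b k : α → Bool) :
    ∀ (l : List α), (∀ x ∈ l, ¬(a x = true ∧ b x = true)) →
    l.countP (fun x => (a x || b x) && k x)
      = l.countP (fun x => a x && k x) + l.countP (fun x => b x && k x) := by
  intro l
  induction l with
  | nil => intro _; simp
  | cons x l ih =>
    intro hd
    simp only [List.countP_cons]
    rw [ih (fun y hy => hd y (List.mem_cons_of_mem _ hy))]
    have := hd x List.mem_cons_self
    by_cases hax : a x = true <;> by_cases hbx : b x = true <;>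
      simp [hax, hbx] at this ⊢ <;> omega

lemma pvCountP_flatMap {α β : Type} (f : α → List β) (p : β → Bool) (l : List α) :
    (l.flatMap f).countP p = (l.map (fun x => (f x).countP p)).sum := by
  induction l with
  | nil => simp
  | cons x l ih => simp [List.flatMap_cons, List.countP_append, ih]

lemma pvCntRow_eq (q : Int → Bool) :
    ∀ (row : List Bool) (c0 : Int),
      pvCntRow q row c0
        = (List.range row.length).countP (fun j => row.getD j false && q (c0 + j)) := by
  intro row
  induction row with
  | nil => intro c0; simp [pvCntRow]
  | cons b row ih =>
    intro c0
    simp only [pvCntRow, List.length_cons, List.range_succ_eq_map, List.countP_cons,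
      List.countP_map]
    rw [ih (c0 + 1)]
    have hcg : (List.range row.length).countP
          ((fun j => (b :: row).getD j false && q (c0 + ↑j)) ∘ Nat.succ)
        = (List.range row.length).countP (fun j => row.getD j false && q (c0 + 1 + ↑j)) := by
      apply List.countP_congr
      intro j _
      simp only [Function.comp_apply, List.getD_cons_succ]
      have : c0 + ((j + 1 : Nat) : Int) = c0 + 1 + (j : Int) := by push_cast; ring
      rw [Nat.succ_eq_add_one, this]
    rw [hcg]
    simp only [Nat.cast_zero, add_zero]
    cases b <;> cases hq : q c0 <;> simp [hq] <;> omega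

lemma pvCntG_eq (p : Int → Int → Bool) :
    ∀ (g : List (List Bool)) (r0 : Int),
      pvCntG p g r0
        = ((List.range g.length).map
            (fun i : Nat => pvCntRow (p (r0 + (i : Int))) (g.getD i []) 0)).sum := by
  intro g
  induction g with
  | nil => intro r0; simp [pvCntG]
  | cons row g ih =>
    intro r0
    simp only [pvCntG, List.length_cons, List.range_succ_eq_map, List.map_cons, List.map_map,
      List.sum_cons]
    rw [ih (r0 + 1)]
    congr 1
    · simp
    · apply congrArg
      apply List.map_congr_left
      intro i _
      simp only [Function.comp_apply, Nat.succ_eq_add_one, List.getD_cons_succ]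
      have : r0 + ((i + 1 : Nat) : Int) = r0 + 1 + (i : Int) := by push_cast; ring
      rw [this]

lemma pvCnt_eq_countP (N M : Int) {g : List (List Bool)} (hs : pvShape N M g)
    (hN : 0 ≤ N) (p : Int → Int → Bool) :
    pvCnt p g = (pvCells N M).countP (fun q => pvGet g q.1 q.2 && p q.1 q.2) := by
  unfold pvCells
  rw [pvCountP_flatMap]
  have hNcast : N = (N.toNat : Int) := by omega
  rw [hNcast, PySem.List.pyRange_zero_natCast, List.map_map]
  unfold pvCnt
  rw [pvCntG_eq, hs.1]
  apply congrArg
  apply List.map_congr_left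
  intro i hi
  have hi' : i < g.length := by rw [hs.1]; exact List.mem_range.mp hi
  simp only [Function.comp_apply, List.countP_map]
  rw [pvCntRow_eq, pvShape_row N M hs hi']
  by_cases hM : 0 ≤ M
  · have hMcast : M = (M.toNat : Int) := by omega
    rw [hMcast, PySem.List.pyRange_zero_natCast, List.countP_map]
    apply List.countP_congr
    intro j _
    simp only [Function.comp_apply, zero_add]
    unfold pvGet pvGetN
    rw [if_pos ⟨Int.natCast_nonneg i, Int.natCast_nonneg j⟩]
    simp
  · have hM0 : M.toNat = 0 := by omega
    have : PySem.List.pyRange 0 M 1 = [] := PySem.List.pyRange_one_eq_nil (by omega)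
    rw [this, hM0]
    simp

-- ---- flattened indices ----

def pvFlat (M : Int) (p : Int × Int) : Int := p.1 * M + p.2

def pvCellOf (M : Int) (k : Nat) : Int × Int :=
  (((k / M.toNat : Nat) : Int), ((k % M.toNat : Nat) : Int))

lemma pvFlat_bounds (N M : Int) (hM : 0 < M) {p : Int × Int}
    (h1 : 0 ≤ p.1) (h2 : p.1 < N) (h3 : 0 ≤ p.2) (h4 : p.2 < M) :
    0 ≤ pvFlat M p ∧ pvFlat M p < N * M := by
  unfold pvFlat
  constructor
  · have : 0 ≤ p.1 * M := mul_nonneg h1 (le_of_lt hM)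
    omega
  · nlinarith

lemma pvCellOf_flat (M : Int) (hM : 0 < M) {p : Int × Int}
    (h1 : 0 ≤ p.1) (h3 : 0 ≤ p.2) (h4 : p.2 < M) :
    pvCellOf M (pvFlat M p).toNat = p := by
  have hcast : pvFlat M p = ((p.2.toNat + p.1.toNat * M.toNat : Nat) : Int) := by
    unfold pvFlat
    push_cast
    have e1 : (p.1.toNat : Int) = p.1 := by omega
    have e2 : (p.2.toNat : Int) = p.2 := by omega
    have e3 : (M.toNat : Int) = M := by omega
    rw [e1, e2, e3]; ring
  have hM' : 0 < M.toNat := by omega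
  have hb : p.2.toNat < M.toNat := by omega
  rw [hcast, Int.toNat_natCast]
  unfold pvCellOf
  rw [Nat.add_mul_div_right _ _ hM', Nat.div_eq_of_lt hb, Nat.add_mul_mod_self_right,
    Nat.mod_eq_of_lt hb]
  have e1 : ((0 + p.1.toNat : Nat) : Int) = p.1 := by omega
  have e2 : ((p.2.toNat : Nat) : Int) = p.2 := by omega
  rw [e1, e2]

-- ---- union-find invariants ----

-- parent entries are valid indices that never increase (union by minimum)
def pvPInv (sz : Int) (par : List Int) : Prop :=
  par.length = sz.toNat ∧
  ∀ k : Nat, k < sz.toNat → 0 ≤ par.getD k 0 ∧ par.getD k 0 ≤ (k : Int)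

-- every non-trivial parent pointer stays inside the connected component
def pvSInv (N M : Int) (matrix : List String) (par : List Int) : Prop :=
  ∀ k : Nat, k < (N * M).toNat → par.getD k 0 ≠ (k : Int) →
    pvReach N M matrix (pvCellOf M k) (pvCellOf M (par.getD k 0).toNat)

lemma pvGetD_set_self (l : List Int) (i : Nat) (v : Int) (h : i < l.length) :
    (l.set i v).getD i 0 = v := by
  simp [List.getD_eq_getElem?_getD, h]

lemma pvGetD_set_ne (l : List Int) (i : Nat) (v : Int) (j : Nat) (h : i ≠ j) :
    (l.set i v).getD j 0 = l.getD j 0 := by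
  simp [List.getD_eq_getElem?_getD, List.getElem?_set_ne h]

lemma pvRoot_zero (sz : Int) (par : List Int) (hP : pvPInv sz par) (hs : 0 < sz) :
    par.getD (0 : Int).toNat 0 = (0 : Int) := by
  have hb := hP.2 0 (by omega)
  simp only [Nat.cast_zero] at hb
  rw [Int.toNat_zero]
  omega

lemma pvFind_fuel (sz : Int) (par : List Int) (hP : pvPInv sz par) :
    ∀ (t : Nat) (x : Int) (n m : Nat), 0 ≤ x → x < sz → x.toNat ≤ t →
      x.toNat < n → x.toNat < m → pvFind par n x = pvFind par m x := by
  intro t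
  induction t with
  | zero =>
    intro x n m hx0 hxs hxt hn hm
    obtain ⟨n, rfl⟩ : ∃ n', n = n' + 1 := ⟨n - 1, by omega⟩
    obtain ⟨m, rfl⟩ : ∃ m', m = m' + 1 := ⟨m - 1, by omega⟩
    have hx : x = 0 := by omega
    subst hx
    have hroot := pvRoot_zero sz par hP (by omega)
    simp only [pvFind]
    rw [if_pos hroot, if_pos hroot]
  | succ t ih =>
    intro x n m hx0 hxs hxt hn hm
    obtain ⟨n, rfl⟩ : ∃ n', n = n' + 1 := ⟨n - 1, by omega⟩
    obtain ⟨m, rfl⟩ : ∃ m', m = m' + 1 := ⟨m - 1, by omega⟩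
    simp only [pvFind]
    by_cases hroot : par.getD x.toNat 0 = x
    · rw [if_pos hroot, if_pos hroot]
    · rw [if_neg hroot, if_neg hroot]
      have hb := hP.2 x.toNat (by omega)
      exact ih (par.getD x.toNat 0) n m hb.1 (by omega) (by omega) (by omega) (by omega)

lemma pvFindR_step (sz : Int) (par : List Int) (hP : pvPInv sz par) (x : Int)
    (hx0 : 0 ≤ x) (hxs : x < sz) :
    pvFindR par x = if par.getD x.toNat 0 = x then x else pvFindR par (par.getD x.toNat 0) := by
  unfold pvFindR
  simp only [pvFind]
  by_cases hroot : par.getD x.toNat 0 = x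
  · rw [if_pos hroot, if_pos hroot]
  · rw [if_neg hroot, if_neg hroot]
    have hb := hP.2 x.toNat (by omega)
    have hlen : par.length = sz.toNat := hP.1
    exact pvFind_fuel sz par hP (par.getD x.toNat 0).toNat (par.getD x.toNat 0)
      par.length (par.length + 1) hb.1 (by omega) (le_refl _) (by omega) (by omega)

lemma pvFindR_spec (sz : Int) (par : List Int) (hP : pvPInv sz par) :
    ∀ (t : Nat) (x : Int), 0 ≤ x → x < sz → x.toNat ≤ t →
      0 ≤ pvFindR par x ∧ pvFindR par x ≤ x ∧
      par.getD (pvFindR par x).toNat 0 = pvFindR par x := by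
  intro t
  induction t with
  | zero =>
    intro x hx0 hxs hxt
    have hx : x = 0 := by omega
    subst hx
    have hroot := pvRoot_zero sz par hP (by omega)
    rw [pvFindR_step sz par hP 0 (by omega) hxs, if_pos hroot]
    exact ⟨le_refl _, le_refl _, hroot⟩
  | succ t ih =>
    intro x hx0 hxs hxt
    rw [pvFindR_step sz par hP x hx0 hxs]
    by_cases hroot : par.getD x.toNat 0 = x
    · rw [if_pos hroot]
      exact ⟨hx0, le_refl _, by rw [hroot]⟩
    · rw [if_neg hroot]
      have hb := hP.2 x.toNat (by omega)
      obtain ⟨r0, r1, r2⟩ := ih (par.getD x.toNat 0) hb.1 (by omega) (by omega)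
      exact ⟨r0, by omega, r2⟩

lemma pvReach_root (N M : Int) (matrix : List String) (par : List Int)
    (hP : pvPInv (N * M) par) (hS : pvSInv N M matrix par) :
    ∀ (t : Nat) (x : Int), 0 ≤ x → x < N * M → x.toNat ≤ t →
      pvReach N M matrix (pvCellOf M x.toNat) (pvCellOf M (pvFindR par x).toNat) := by
  intro t
  induction t with
  | zero =>
    intro x hx0 hxs hxt
    have hx : x = 0 := by omega
    subst hx
    have hroot := pvRoot_zero (N * M) par hP (by omega)
    rw [pvFindR_step (N * M) par hP 0 (by omega) hxs, if_pos hroot]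
    exact Relation.ReflTransGen.refl
  | succ t ih =>
    intro x hx0 hxs hxt
    rw [pvFindR_step (N * M) par hP x hx0 hxs]
    by_cases hroot : par.getD x.toNat 0 = x
    · rw [if_pos hroot]
      exact Relation.ReflTransGen.refl
    · rw [if_neg hroot]
      have hb := hP.2 x.toNat (by omega)
      have h1 : pvReach N M matrix (pvCellOf M x.toNat)
          (pvCellOf M (par.getD x.toNat 0).toNat) :=
        hS x.toNat (by omega) (by
          intro h
          exact hroot (by omega))
      have h2 := ih (par.getD x.toNat 0) hb.1 (by omega) (by omega)
      exact Relation.ReflTransGen.trans h1 h2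

lemma pvSet_rho (sz : Int) (par : List Int) (hP : pvPInv sz par) {ra rb : Int}
    (h0 : 0 ≤ ra) (hab : ra < rb) (hbs : rb < sz)
    (hrb : par.getD rb.toNat 0 = rb) (hra : par.getD ra.toNat 0 = ra) :
    pvPInv sz (par.set rb.toNat ra) ∧
    ∀ x, 0 ≤ x → x < sz →
      pvFindR (par.set rb.toNat ra) x
        = (if pvFindR par x = rb then ra else pvFindR par x) := by
  have hlen : (par.set rb.toNat ra).length = par.length := List.length_set
  have hrbl : rb.toNat < par.length := by have := hP.1; omega
  have hgd : ∀ j : Nat, (par.set rb.toNat ra).getD j 0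
      = if j = rb.toNat then ra else par.getD j 0 := by
    intro j
    by_cases hj : j = rb.toNat
    · subst hj; rw [if_pos rfl]; exact pvGetD_set_self par _ ra hrbl
    · rw [if_neg hj]; exact pvGetD_set_ne par _ ra j (fun h => hj h.symm)
  have hP' : pvPInv sz (par.set rb.toNat ra) := by
    refine ⟨by rw [hlen]; exact hP.1, ?_⟩
    intro k hk
    rw [hgd k]
    by_cases hj : k = rb.toNat
    · rw [if_pos hj]; exact ⟨h0, by omega⟩
    · rw [if_neg hj]; exact hP.2 k hk
  refine ⟨hP', ?_⟩
  have main : ∀ (t : Nat) (x : Int), 0 ≤ x → x < sz → x.toNat ≤ t →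
      pvFindR (par.set rb.toNat ra) x
        = (if pvFindR par x = rb then ra else pvFindR par x) := by
    intro t
    induction t with
    | zero =>
      intro x hx0 hxs hxt
      have hx : x = 0 := by omega
      subst hx
      have hroot := pvRoot_zero sz par hP (by omega)
      have hroot' := pvRoot_zero sz _ hP' (by omega)
      rw [pvFindR_step sz _ hP' 0 (by omega) hxs, if_pos hroot',
        pvFindR_step sz par hP 0 (by omega) hxs, if_pos hroot]
      have : (0 : Int) ≠ rb := by omega
      rw [if_neg this]
    | succ t ih =>
      intro x hx0 hxs hxt
      rw [pvFindR_step sz _ hP' x hx0 hxs, pvFindR_step sz par hP x hx0 hxs, hgd x.toNat]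
      by_cases hxb : x.toNat = rb.toNat
      · have hxrb : x = rb := by omega
        rw [if_pos hxb]
        have hne : ra ≠ x := by omega
        have hgx : par.getD x.toNat 0 = x := by
          calc par.getD x.toNat 0 = par.getD rb.toNat 0 := by rw [hxb]
            _ = rb := hrb
            _ = x := hxrb.symm
        rw [if_neg hne, if_pos hgx, if_pos hxrb]
        -- in the updated parent, ra is still its own root
        have hrane : ra.toNat ≠ rb.toNat := by omega
        have hg2 : (par.set rb.toNat ra).getD ra.toNat 0 = ra := by
          rw [hgd ra.toNat, if_neg hrane, hra]
        rw [pvFindR_step sz _ hP' ra h0 (by omega), if_pos hg2]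
      · rw [if_neg hxb]
        by_cases hroot : par.getD x.toNat 0 = x
        · rw [if_pos hroot, if_pos hroot]
          have : x ≠ rb := by omega
          rw [if_neg this]
        · rw [if_neg hroot, if_neg hroot]
          have hb := hP.2 x.toNat (by omega)
          exact ih (par.getD x.toNat 0) hb.1 (by omega) (by omega)
  intro x hx0 hxs
  exact main x.toNat x hx0 hxs (le_refl _)

-- ---- union operation ----

lemma pvUnionOp_spec (N M : Int) (matrix : List String) (par : List Int)
    (hP : pvPInv (N * M) par) (hS : pvSInv N M matrix par)
    {a b : Int} (ha0 : 0 ≤ a) (has : a < N * M) (hb0 : 0 ≤ b) (hbs : b < N * M)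
    (hre : pvReach N M matrix (pvCellOf M a.toNat) (pvCellOf M b.toNat)) :
    pvPInv (N * M) (pvUnionOp par a b) ∧ pvSInv N M matrix (pvUnionOp par a b) ∧
    (∀ x y, 0 ≤ x → x < N * M → 0 ≤ y → y < N * M →
      pvFindR par x = pvFindR par y →
      pvFindR (pvUnionOp par a b) x = pvFindR (pvUnionOp par a b) y) ∧
    pvFindR (pvUnionOp par a b) a = pvFindR (pvUnionOp par a b) b := by
  obtain ⟨ha1, ha2, ha3⟩ := pvFindR_spec (N * M) par hP a.toNat a ha0 has (le_refl _)
  obtain ⟨hb1, hb2, hb3⟩ := pvFindR_spec (N * M) par hP b.toNat b hb0 hbs (le_refl _)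
  have hRa := pvReach_root N M matrix par hP hS a.toNat a ha0 has (le_refl _)
  have hRb := pvReach_root N M matrix par hP hS b.toNat b hb0 hbs (le_refl _)
  unfold pvUnionOp
  by_cases h1 : pvFindR par a = pvFindR par b
  · rw [if_pos h1]
    refine ⟨hP, hS, fun x y _ _ _ _ h => h, h1⟩
  · rw [if_neg h1]
    by_cases h2 : pvFindR par a < pvFindR par b
    · rw [if_pos h2]
      obtain ⟨hP', hrho⟩ := pvSet_rho (N * M) par hP ha1 h2 (by omega) hb3 ha3
      refine ⟨hP', ?_, ?_, ?_⟩
      · -- SInv for the updated parent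
        intro k hk hne
        have hrbl : (pvFindR par b).toNat < par.length := by have := hP.1; omega
        by_cases hj : k = (pvFindR par b).toNat
        · subst hj
          rw [pvGetD_set_self par _ _ hrbl] at hne ⊢
          have hcomp : pvReach N M matrix (pvCellOf M (pvFindR par b).toNat)
              (pvCellOf M (pvFindR par a).toNat) :=
            Relation.ReflTransGen.trans (pvReach_symm N M matrix hRb)
              (Relation.ReflTransGen.trans (pvReach_symm N M matrix hre) hRa)
          exact hcomp
        · rw [pvGetD_set_ne par _ _ k (fun h => hj h.symm)] at hne ⊢
          exact hS k hk hne
      · intro x y hx0 hxs hy0 hys h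
        rw [hrho x hx0 hxs, hrho y hy0 hys, h]
      · rw [hrho a ha0 has, hrho b hb0 hbs, if_pos rfl]
        have : ¬ (pvFindR par a = pvFindR par b) := h1
        rw [if_neg this]
    · rw [if_neg h2]
      have h2' : pvFindR par b < pvFindR par a := by omega
      obtain ⟨hP', hrho⟩ := pvSet_rho (N * M) par hP hb1 h2' (by omega) ha3 hb3
      refine ⟨hP', ?_, ?_, ?_⟩
      · intro k hk hne
        have hral : (pvFindR par a).toNat < par.length := by have := hP.1; omega
        by_cases hj : k = (pvFindR par a).toNat
        · subst hj
          rw [pvGetD_set_self par _ _ hral] at hne ⊢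
          exact Relation.ReflTransGen.trans (pvReach_symm N M matrix hRa)
            (Relation.ReflTransGen.trans hre hRb)
        · rw [pvGetD_set_ne par _ _ k (fun h => hj h.symm)] at hne ⊢
          exact hS k hk hne
      · intro x y hx0 hxs hy0 hys h
        rw [hrho x hx0 hxs, hrho y hy0 hys, h]
      · rw [hrho a ha0 has, hrho b hb0 hbs, if_pos rfl]
        have : ¬ (pvFindR par b = pvFindR par a) := fun h => h1 h.symm
        rw [if_neg this]

-- ---- the first pass establishes the component structure ----

def pvDone (N M : Int) (matrix : List String) (par : List Int) (p : Int × Int) : Prop :=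
  pvPass N M matrix p →
    (pvPass N M matrix (p.1 + 1, p.2) →
      pvFindR par (pvFlat M p) = pvFindR par (pvFlat M (p.1 + 1, p.2))) ∧
    (pvPass N M matrix (p.1, p.2 + 1) →
      pvFindR par (pvFlat M p) = pvFindR par (pvFlat M (p.1, p.2 + 1)))

def pvInv1 (N M : Int) (matrix : List String) (L : List (Int × Int)) (par : List Int) : Prop :=
  pvPInv (N * M) par ∧ pvSInv N M matrix par ∧ ∀ p ∈ L, pvDone N M matrix par p

lemma pvPass_flat (N M : Int) (hM : 0 < M) {matrix : List String} {p : Int × Int}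
    (hp : pvPass N M matrix p) :
    (0 ≤ pvFlat M p ∧ pvFlat M p < N * M) ∧ pvCellOf M (pvFlat M p).toNat = p :=
  ⟨pvFlat_bounds N M hM hp.1 hp.2.1 hp.2.2.1 hp.2.2.2.1,
   pvCellOf_flat M hM hp.1 hp.2.2.1 hp.2.2.2.1⟩

lemma pvUnite_step (N M : Int) (hM : 0 < M) (matrix : List String) (par : List Int)
    {p : Int × Int} (hb1 : 0 ≤ p.1) (hb2 : p.1 < N) (hb3 : 0 ≤ p.2) (hb4 : p.2 < M)
    (L : List (Int × Int)) (hInv : pvInv1 N M matrix L par) :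
    pvInv1 N M matrix (L ++ [p]) (pvUnite N M matrix par p.1 p.2) := by
  obtain ⟨hP, hS, hD⟩ := hInv
  unfold pvUnite
  by_cases hpc : pvPassC (pvCell matrix p.1 p.2) = true
  · rw [if_pos hpc]
    have hpass : pvPass N M matrix p := ⟨hb1, hb2, hb3, hb4, hpc⟩
    -- first (conditional) union, with the down neighbour
    by_cases hg1 : p.1 + 1 < N ∧ pvPassC (pvCell matrix (p.1 + 1) p.2) = true
    · rw [if_pos hg1]
      have hpassd : pvPass N M matrix (p.1 + 1, p.2) := ⟨by omega, hg1.1, hb3, hb4, hg1.2⟩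
      have hstep : pvStepR N M matrix p (p.1 + 1, p.2) :=
        ⟨hpass, hpassd, by simp [pvNbrs]⟩
      obtain ⟨hfb, hfc⟩ := pvPass_flat N M hM hpass
      obtain ⟨hfb', hfc'⟩ := pvPass_flat N M hM hpassd
      have hre : pvReach N M matrix (pvCellOf M (pvFlat M p).toNat)
          (pvCellOf M (pvFlat M (p.1 + 1, p.2)).toNat) := by
        rw [hfc, hfc']
        exact Relation.ReflTransGen.single hstep
      have hflat : pvFlat M (p.1 + 1, p.2) = (p.1 + 1) * M + p.2 := rfl
      obtain ⟨hP1, hS1, hmono1, heq1⟩ :=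
        pvUnionOp_spec N M matrix par hP hS hfb.1 hfb.2 hfb'.1 hfb'.2 hre
      rw [show p.1 * M + p.2 = pvFlat M p from rfl, ← hflat]
      -- second (conditional) union, with the right neighbour
      by_cases hg2 : p.2 + 1 < M ∧ pvPassC (pvCell matrix p.1 (p.2 + 1)) = true
      · rw [if_pos hg2]
        have hpassr : pvPass N M matrix (p.1, p.2 + 1) := ⟨hb1, hb2, by omega, hg2.1, hg2.2⟩
        have hstep2 : pvStepR N M matrix p (p.1, p.2 + 1) :=
          ⟨hpass, hpassr, by simp [pvNbrs]⟩
        obtain ⟨hfb'', hfc''⟩ := pvPass_flat N M hM hpassr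
        have hre2 : pvReach N M matrix
            (pvCellOf M (pvFlat M p).toNat) (pvCellOf M (pvFlat M (p.1, p.2 + 1)).toNat) := by
          rw [hfc, hfc'']
          exact Relation.ReflTransGen.single hstep2
        obtain ⟨hP2, hS2, hmono2, heq2⟩ :=
          pvUnionOp_spec N M matrix _ hP1 hS1 hfb.1 hfb.2 hfb''.1 hfb''.2 hre2
        have hflat2 : pvFlat M (p.1, p.2 + 1) = pvFlat M p + 1 := by
          unfold pvFlat; ring
        rw [← hflat2]
        refine ⟨hP2, hS2, ?_⟩
        intro q hq
        rcases List.mem_append.mp hq with hq | hq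
        · intro hqp
          obtain ⟨hd1, hd2⟩ := hD q hq hqp
          obtain ⟨hqb, _⟩ := pvPass_flat N M hM hqp
          constructor
          · intro hqn
            obtain ⟨hqb', _⟩ := pvPass_flat N M hM hqn
            exact hmono2 _ _ hqb.1 hqb.2 hqb'.1 hqb'.2
              (hmono1 _ _ hqb.1 hqb.2 hqb'.1 hqb'.2 (hd1 hqn))
          · intro hqn
            obtain ⟨hqb', _⟩ := pvPass_flat N M hM hqn
            exact hmono2 _ _ hqb.1 hqb.2 hqb'.1 hqb'.2
              (hmono1 _ _ hqb.1 hqb.2 hqb'.1 hqb'.2 (hd2 hqn))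
        · have hqp : q = p := by simpa using hq
          subst hqp
          intro _
          exact ⟨fun _ => hmono2 _ _ hfb.1 hfb.2 hfb'.1 hfb'.2 heq1, fun _ => heq2⟩
      · rw [if_neg hg2]
        refine ⟨hP1, hS1, ?_⟩
        intro q hq
        rcases List.mem_append.mp hq with hq | hq
        · intro hqp
          obtain ⟨hd1, hd2⟩ := hD q hq hqp
          obtain ⟨hqb, _⟩ := pvPass_flat N M hM hqp
          constructor
          · intro hqn
            obtain ⟨hqb', _⟩ := pvPass_flat N M hM hqn
            exact hmono1 _ _ hqb.1 hqb.2 hqb'.1 hqb'.2 (hd1 hqn)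
          · intro hqn
            obtain ⟨hqb', _⟩ := pvPass_flat N M hM hqn
            exact hmono1 _ _ hqb.1 hqb.2 hqb'.1 hqb'.2 (hd2 hqn)
        · have hqp : q = p := by simpa using hq
          subst hqp
          intro _
          refine ⟨fun _ => heq1, fun hqn => ?_⟩
          exact absurd ⟨hqn.2.2.2.1, hqn.2.2.2.2⟩ hg2
    · rw [if_neg hg1]
      by_cases hg2 : p.2 + 1 < M ∧ pvPassC (pvCell matrix p.1 (p.2 + 1)) = true
      · rw [if_pos hg2]
        have hpassr : pvPass N M matrix (p.1, p.2 + 1) := ⟨hb1, hb2, by omega, hg2.1, hg2.2⟩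
        have hstep2 : pvStepR N M matrix p (p.1, p.2 + 1) :=
          ⟨hpass, hpassr, by simp [pvNbrs]⟩
        obtain ⟨hfb, hfc⟩ := pvPass_flat N M hM hpass
        obtain ⟨hfb'', hfc''⟩ := pvPass_flat N M hM hpassr
        have hre2 : pvReach N M matrix
            (pvCellOf M (pvFlat M p).toNat) (pvCellOf M (pvFlat M (p.1, p.2 + 1)).toNat) := by
          rw [hfc, hfc'']
          exact Relation.ReflTransGen.single hstep2
        obtain ⟨hP2, hS2, hmono2, heq2⟩ :=
          pvUnionOp_spec N M matrix par hP hS hfb.1 hfb.2 hfb''.1 hfb''.2 hre2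
        have hflat2 : pvFlat M (p.1, p.2 + 1) = pvFlat M p + 1 := by
          unfold pvFlat; ring
        rw [show p.1 * M + p.2 = pvFlat M p from rfl]
        rw [show pvFlat M p + 1 = pvFlat M (p.1, p.2 + 1) from hflat2.symm]
        refine ⟨hP2, hS2, ?_⟩
        intro q hq
        rcases List.mem_append.mp hq with hq | hq
        · intro hqp
          obtain ⟨hd1, hd2⟩ := hD q hq hqp
          obtain ⟨hqb, _⟩ := pvPass_flat N M hM hqp
          constructor
          · intro hqn
            obtain ⟨hqb', _⟩ := pvPass_flat N M hM hqn
            exact hmono2 _ _ hqb.1 hqb.2 hqb'.1 hqb'.2 (hd1 hqn)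
          · intro hqn
            obtain ⟨hqb', _⟩ := pvPass_flat N M hM hqn
            exact hmono2 _ _ hqb.1 hqb.2 hqb'.1 hqb'.2 (hd2 hqn)
        · have hqp : q = p := by simpa using hq
          subst hqp
          intro _
          refine ⟨fun hqn => ?_, fun _ => heq2⟩
          exact absurd ⟨hqn.2.1, hqn.2.2.2.2⟩ hg1
      · rw [if_neg hg2]
        refine ⟨hP, hS, ?_⟩
        intro q hq
        rcases List.mem_append.mp hq with hq | hq
        · exact hD q hq
        · have hqp : q = p := by simpa using hq
          subst hqp
          intro _
          refine ⟨fun hqn => ?_, fun hqn => ?_⟩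
          · exact absurd ⟨hqn.2.1, hqn.2.2.2.2⟩ hg1
          · exact absurd ⟨hqn.2.2.2.1, hqn.2.2.2.2⟩ hg2
  · rw [if_neg hpc]
    refine ⟨hP, hS, ?_⟩
    intro q hq
    rcases List.mem_append.mp hq with hq | hq
    · exact hD q hq
    · have hqp : q = p := by simpa using hq
      subst hqp
      intro hqp'
      exact absurd hqp'.2.2.2.2 hpc

lemma pvPass1_fold (N M : Int) (hM : 0 < M) (matrix : List String) :
    ∀ (L2 : List (Int × Int)), (∀ p ∈ L2, 0 ≤ p.1 ∧ p.1 < N ∧ 0 ≤ p.2 ∧ p.2 < M) →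
    ∀ (par : List Int) (L1 : List (Int × Int)), pvInv1 N M matrix L1 par →
    pvInv1 N M matrix (L1 ++ L2)
      (L2.foldl (fun par p => pvUnite N M matrix par p.1 p.2) par) := by
  intro L2
  induction L2 with
  | nil => intro _ par L1 h; simpa using h
  | cons p L2 ih =>
    intro hbs par L1 hInv
    have hb := hbs p List.mem_cons_self
    have h1 := pvUnite_step N M hM matrix par hb.1 hb.2.1 hb.2.2.1 hb.2.2.2 L1 hInv
    have h2 := ih (fun q hq => hbs q (List.mem_cons_of_mem _ hq)) _ (L1 ++ [p]) h1
    simpa [List.append_assoc] using h2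

lemma pvInv1_init (N M : Int) (hM : 0 < M) (hN : 0 < N) (matrix : List String) :
    pvInv1 N M matrix [] (PySem.List.pyRange 0 (N * M) 1) := by
  have hcast : N * M = (((N * M).toNat : Nat) : Int) := by
    have : 0 ≤ N * M := mul_nonneg (by omega) (by omega)
    omega
  have hrange : PySem.List.pyRange 0 (N * M) 1
      = (List.range (N * M).toNat).map (fun k : Nat => (k : Int)) := by
    conv_lhs => rw [hcast]
    exact PySem.List.pyRange_zero_natCast _
  constructor
  · constructor
    · rw [hrange]; simp
    · intro k hk
      rw [hrange, PySem.List.getD_map_range _ _ _ _ hk]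
      omega
  · constructor
    · intro k hk hne
      rw [hrange, PySem.List.getD_map_range _ _ _ _ hk] at hne
      exact absurd rfl hne
    · intro p hp
      simp at hp

-- the final labelling classifies cells exactly by connectivity
lemma pvLabel_iff (N M : Int) (hM : 0 < M) (hN : 0 < N) (matrix : List String)
    {P : List Int} (hInv : pvInv1 N M matrix (pvCells N M) P) {p q : Int × Int}
    (hp : pvPass N M matrix p) (hq : pvPass N M matrix q) :
    pvFindR P (pvFlat M p) = pvFindR P (pvFlat M q) ↔ pvReach N M matrix p q := by
  obtain ⟨hP, hS, hD⟩ := hInv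
  constructor
  · intro h
    obtain ⟨hfb, hfc⟩ := pvPass_flat N M hM hp
    obtain ⟨hfb', hfc'⟩ := pvPass_flat N M hM hq
    have hRp := pvReach_root N M matrix P hP hS (pvFlat M p).toNat (pvFlat M p)
      hfb.1 hfb.2 (le_refl _)
    have hRq := pvReach_root N M matrix P hP hS (pvFlat M q).toNat (pvFlat M q)
      hfb'.1 hfb'.2 (le_refl _)
    rw [hfc] at hRp
    rw [hfc'] at hRq
    rw [h] at hRp
    exact Relation.ReflTransGen.trans hRp (pvReach_symm N M matrix hRq)
  · intro h
    induction h with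
    | refl => rfl
    | @tail b c hab hbc ih =>
      obtain ⟨hpb, hpc, hmem⟩ := hbc
      rw [ih hpb]
      have hmemb : b ∈ pvCells N M := (pvMem_cells N M b).mpr
        ⟨hpb.1, hpb.2.1, hpb.2.2.1, hpb.2.2.2.1⟩
      have hmemc : c ∈ pvCells N M := (pvMem_cells N M c).mpr
        ⟨hpc.1, hpc.2.1, hpc.2.2.1, hpc.2.2.2.1⟩
      simp only [pvNbrs, List.mem_cons, List.not_mem_nil, or_false] at hmem
      rcases hmem with rfl | rfl | rfl | rfl
      · exact (hD b hmemb hpb).1 (by simpa using hpc)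
      · have hbe : b = ((b.1 - 1, b.2).1 + 1, (b.1 - 1, b.2).2) := by
          simp
        have := (hD _ hmemc hpc).1 (by rw [← hbe]; exact hpb)
        rw [← hbe] at this
        exact this.symm
      · exact (hD b hmemb hpb).2 (by simpa using hpc)
      · have hbe : b = ((b.1, b.2 - 1).1, (b.1, b.2 - 1).2 + 1) := by
          simp
        have := (hD _ hmemc hpc).2 (by rw [← hbe]; exact hpb)
        rw [← hbe] at this
        exact this.symm

-- ---- the shared per-component target quantities ----

def pvPassB (matrix : List String) (p : Int × Int) : Bool := pvPassC (pvCell matrix p.1 p.2)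
def pvKB (matrix : List String) (p : Int × Int) : Bool := pvCell matrix p.1 p.2 == 'k'
def pvVB (matrix : List String) (p : Int × Int) : Bool := pvCell matrix p.1 p.2 == 'v'
def pvBB (N M : Int) (p : Int × Int) : Bool := pvBdry N M p.1 p.2
def pvLab (M : Int) (P : List Int) (p : Int × Int) : Int := pvFindR P (pvFlat M p)

def pvSC (N M : Int) (matrix : List String) (P : List Int) (l : Int) : Int :=
  ((pvCells N M).countP
    (fun x => pvPassB matrix x && (pvLab M P x == l) && pvKB matrix x) : Int)

def pvWC (N M : Int) (matrix : List String) (P : List Int) (l : Int) : Int :=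
  ((pvCells N M).countP
    (fun x => pvPassB matrix x && (pvLab M P x == l) && pvVB matrix x) : Int)

def pvOC (N M : Int) (matrix : List String) (P : List Int) (l : Int) : Bool :=
  (pvCells N M).any (fun x => pvPassB matrix x && (pvLab M P x == l) && pvBB N M x)

def pvSurvS (N M : Int) (matrix : List String) (P : List Int) (l : Int) : Bool :=
  pvOC N M matrix P l || decide (pvSC N M matrix P l > pvWC N M matrix P l)

def pvSurvW (N M : Int) (matrix : List String) (P : List Int) (l : Int) : Bool :=
  pvOC N M matrix P l || !decide (pvSC N M matrix P l > pvWC N M matrix P l)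

def pvTS (N M : Int) (matrix : List String) (P : List Int) : Int :=
  ((pvCells N M).countP
    (fun x => pvPassB matrix x &&
      (pvKB matrix x && pvSurvS N M matrix P (pvLab M P x))) : Int)

def pvTW (N M : Int) (matrix : List String) (P : List Int) : Int :=
  ((pvCells N M).countP
    (fun x => pvPassB matrix x &&
      (pvVB matrix x && pvSurvW N M matrix P (pvLab M P x))) : Int)

lemma pvBool_eq {a b : Bool} (h : (a = true) ↔ (b = true)) : a = b := by
  cases a <;> cases b <;> simp_all

-- the component of a passable cell, read off from the final labelling
def pvCmpB (N M : Int) (matrix : List String) (P : List Int) (p : Int × Int)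
    (x : Int × Int) : Bool :=
  pvPassB matrix x && (pvLab M P x == pvLab M P p)

lemma pvCmp_iff (N M : Int) (hM : 0 < M) (hN : 0 < N) (matrix : List String)
    {P : List Int} (hInv : pvInv1 N M matrix (pvCells N M) P) {p x : Int × Int}
    (hp : pvPass N M matrix p) (hx : x ∈ pvCells N M) :
    pvReach N M matrix p x ↔ pvCmpB N M matrix P p x = true := by
  obtain ⟨hb1, hb2, hb3, hb4⟩ := (pvMem_cells N M x).mp hx
  unfold pvCmpB
  constructor
  · intro h
    have hpx : pvPass N M matrix x := pvReach_pass N M matrix hp h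
    have hlab : pvLab M P p = pvLab M P x :=
      (pvLabel_iff N M hM hN matrix hInv hp hpx).mpr h
    simp only [pvPassB, pvLab] at *
    rw [← hlab]
    simp [hpx.2.2.2.2]
  · intro h
    simp only [Bool.and_eq_true, beq_iff_eq] at h
    have hpx : pvPass N M matrix x := ⟨hb1, hb2, hb3, hb4, h.1⟩
    exact pvReach_symm N M matrix
      ((pvLabel_iff N M hM hN matrix hInv hpx hp).mp h.2)

-- ---- A's outer loop invariant ----

def pvInvA (N M : Int) (matrix : List String) (P : List Int) (L : List (Int × Int))
    (st : List (List Bool) × Int × Int) : Prop :=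
  pvShape N M st.1 ∧
  (∀ q, pvVS st.1 q ↔
    (pvPass N M matrix q ∧ ∃ p ∈ L, pvPass N M matrix p ∧ pvReach N M matrix p q)) ∧
  st.2.1 = ((pvCells N M).countP
    (fun x => pvGet st.1 x.1 x.2 &&
      (pvKB matrix x && pvSurvS N M matrix P (pvLab M P x))) : Int) ∧
  st.2.2 = ((pvCells N M).countP
    (fun x => pvGet st.1 x.1 x.2 &&
      (pvVB matrix x && pvSurvW N M matrix P (pvLab M P x))) : Int)

lemma pvCntP_decomp (N M : Int) {vis vis' : List (List Bool)} (cb : Int × Int → Bool)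
    (hiff : ∀ x ∈ pvCells N M, pvVS vis' x ↔ (pvVS vis x ∨ cb x = true))
    (hdis : ∀ x ∈ pvCells N M, cb x = true → ¬ pvVS vis x) (k : Int × Int → Bool) :
    (pvCells N M).countP (fun x => pvGet vis' x.1 x.2 && k x)
      = (pvCells N M).countP (fun x => pvGet vis x.1 x.2 && k x)
        + (pvCells N M).countP (fun x => cb x && k x) := by
  have hcg : (pvCells N M).countP (fun x => pvGet vis' x.1 x.2 && k x)
      = (pvCells N M).countP (fun x => (pvGet vis x.1 x.2 || cb x) && k x) := by
    apply List.countP_congr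
    intro x hx
    have h1 : pvGet vis' x.1 x.2 = true ↔ pvVS vis' x := Iff.rfl
    have h2 : pvGet vis x.1 x.2 = true ↔ pvVS vis x := Iff.rfl
    simp only [Bool.and_eq_true, Bool.or_eq_true]
    rw [h1, h2, hiff x hx]
  rw [hcg]
  apply pvCountP_or
  intro x hx
  rintro ⟨hv, hr⟩
  exact hdis x hx hr hv

lemma pvShape_mkGrid (N M : Int) : pvShape N M (pvMkGrid N.toNat M.toNat) := by
  constructor
  · simp [pvMkGrid]
  · intro row hrow
    simp only [pvMkGrid, List.mem_map] at hrow
    obtain ⟨-, -, rfl⟩ := hrow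
    simp

lemma pvGet_mkGrid (N M : Int) (r c : Int) : pvGet (pvMkGrid N.toNat M.toNat) r c = false := by
  unfold pvGet pvGetN pvMkGrid
  split
  · simp only [List.getD_eq_getElem?_getD]
    by_cases hi : r.toNat < N.toNat
    · have h1 : ((List.range N.toNat).map
          (fun _ => List.replicate M.toNat false))[r.toNat]?
          = some (List.replicate M.toNat false) := by
        simp [hi]
      rw [h1, Option.getD_some, List.getElem?_replicate]
      split <;> rfl
    · have h1 : ((List.range N.toNat).map
          (fun _ => List.replicate M.toNat false))[r.toNat]? = none := by
        simp only [List.getElem?_map, List.map_eq_map]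
        rw [List.getElem?_eq_none (by simpa using (by omega : N.toNat ≤ r.toNat))]
        rfl
      rw [h1]
      rfl
  · rfl

lemma pvCellA_inv (N M : Int) (hM : 0 < M) (hN : 0 < N) (matrix : List String)
    {P : List Int} (hInv1 : pvInv1 N M matrix (pvCells N M) P)
    {p : Int × Int} (hpm : p ∈ pvCells N M) {L : List (Int × Int)}
    {st : List (List Bool) × Int × Int} (h : pvInvA N M matrix P L st) :
    pvInvA N M matrix P (L ++ [p]) (pvCellA N M matrix st p.1 p.2) := by
  obtain ⟨hsh, hvis, hts, htw⟩ := h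
  obtain ⟨hb1, hb2, hb3, hb4⟩ := (pvMem_cells N M p).mp hpm
  have hVcl : ∀ a b, pvVS st.1 a → pvStepR N M matrix a b → pvVS st.1 b := by
    intro a b ha hstep
    obtain ⟨hpa, ⟨s, hs, hps, hr⟩⟩ := (hvis a).mp ha
    exact (hvis b).mpr ⟨hstep.2.1, s, hs, hps, hr.tail hstep⟩
  by_cases hcond : pvPassC (pvCell matrix p.1 p.2) = true ∧ pvGet st.1 p.1 p.2 = false
  · have hpass : pvPass N M matrix p := ⟨hb1, hb2, hb3, hb4, hcond.1⟩
    have hnotv : ¬ pvVS st.1 p := by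
      unfold pvVS
      simp [hcond.2]
    have havoid := pvReach_avoid N M matrix hVcl hnotv
    have hs1 : pvShape N M (pvSet st.1 p.1 p.2) := pvShape_set N M hsh p.1 p.2
    have hVS1 : pvVS (pvSet st.1 p.1 p.2) = fun c => c = p ∨ pvVS st.1 c :=
      pvVS_set_fun N M hsh (b := p) hb1 hb2 hb3 hb4
    have hfc := pvF_set N M hsh (b := p) hb1 hb2 hb3 hb4 hcond.2
    have hfle := pvF_le N M hsh
    have hfuel : 2 * pvF (pvSet st.1 p.1 p.2) + ([((p.1 : Int), (p.2 : Int))]).length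
        ≤ 2 * (N.toNat * M.toNat) + 1 := by
      simp only [List.length_cons, List.length_nil]
      omega
    have hseed : ∀ x ∈ [((p.1 : Int), (p.2 : Int))], pvVS (pvSet st.1 p.1 p.2) x := by
      intro x hx
      have hxp : x = p := by simpa using hx
      rw [hVS1, hxp]
      exact Or.inl rfl
    obtain ⟨vis', heq, hs', hrv, hk', hv', hb'⟩ :=
      pvLoopA_spec N M matrix (2 * (N.toNat * M.toNat) + 1) [(p.1, p.2)]
        (pvSet st.1 p.1 p.2)
        (if pvCell matrix p.1 p.2 = 'k' then 1 else 0)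
        (if pvCell matrix p.1 p.2 = 'v' then 1 else 0)
        (! pvBdry N M p.1 p.2) hs1 hseed hfuel
    have hrv2 : pvVS vis' = fun q => pvVS st.1 q ∨ pvReach N M matrix p q := by
      rw [hrv]
      have hpe : ((p.1, p.2) : Int × Int) = p := rfl
      rw [hpe, hVS1]
      exact pvRV_reach N M matrix hVcl hpass hnotv
    have hiff : ∀ x ∈ pvCells N M,
        pvVS vis' x ↔ (pvVS st.1 x ∨ pvCmpB N M matrix P p x = true) := by
      intro x hx
      rw [hrv2]
      exact or_congr Iff.rfl (pvCmp_iff N M hM hN matrix hInv1 hpass hx)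
    have hdis : ∀ x ∈ pvCells N M, pvCmpB N M matrix P p x = true → ¬ pvVS st.1 x := by
      intro x hx hc
      exact havoid x ((pvCmp_iff N M hM hN matrix hInv1 hpass hx).mpr hc)
    -- count bridges and decompositions
    have hbrK := pvCnt_eq_countP N M hs1 (by omega) (pvKP matrix)
    have hbrK' := pvCnt_eq_countP N M hs' (by omega) (pvKP matrix)
    have hbrV := pvCnt_eq_countP N M hs1 (by omega) (pvVP matrix)
    have hbrV' := pvCnt_eq_countP N M hs' (by omega) (pvVP matrix)
    have hbrB := pvCnt_eq_countP N M hs1 (by omega) (pvBP N M)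
    have hbrB' := pvCnt_eq_countP N M hs' (by omega) (pvBP N M)
    have hbr0K := pvCnt_eq_countP N M hsh (by omega) (pvKP matrix)
    have hbr0V := pvCnt_eq_countP N M hsh (by omega) (pvVP matrix)
    have hbr0B := pvCnt_eq_countP N M hsh (by omega) (pvBP N M)
    have hcntK1 := pvCnt_set (pvKP matrix) N M hsh (b := p) hb1 hb2 hb3 hb4 hcond.2
    have hcntV1 := pvCnt_set (pvVP matrix) N M hsh (b := p) hb1 hb2 hb3 hb4 hcond.2
    have hcntB1 := pvCnt_set (pvBP N M) N M hsh (b := p) hb1 hb2 hb3 hb4 hcond.2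
    have hdecK := pvCntP_decomp N M (pvCmpB N M matrix P p) hiff hdis
      (fun x => pvKP matrix x.1 x.2)
    have hdecV := pvCntP_decomp N M (pvCmpB N M matrix P p) hiff hdis
      (fun x => pvVP matrix x.1 x.2)
    have hdecB := pvCntP_decomp N M (pvCmpB N M matrix P p) hiff hdis
      (fun x => pvBP N M x.1 x.2)
    -- the three returned accumulators, identified with the per-label quantities
    have hKBeq : ∀ x : Int × Int, pvKP matrix x.1 x.2 = pvKB matrix x := fun _ => rfl
    have hSCn : (pvCells N M).countP
        (fun x => pvCmpB N M matrix P p x && pvKP matrix x.1 x.2)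
        = (pvCells N M).countP
          (fun x => pvPassB matrix x && (pvLab M P x == pvLab M P p) && pvKB matrix x) := by
      apply List.countP_congr
      intro x _
      unfold pvCmpB
      rfl
    have hWCn : (pvCells N M).countP
        (fun x => pvCmpB N M matrix P p x && pvVP matrix x.1 x.2)
        = (pvCells N M).countP
          (fun x => pvPassB matrix x && (pvLab M P x == pvLab M P p) && pvVB matrix x) := by
      apply List.countP_congr
      intro x _
      unfold pvCmpB
      rfl
    have hSval : (if pvCell matrix p.1 p.2 = 'k' then (1 : Int) else 0)
        + ((pvCnt (pvKP matrix) vis' : Int) - (pvCnt (pvKP matrix) (pvSet st.1 p.1 p.2) : Int))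
        = pvSC N M matrix P (pvLab M P p) := by
      unfold pvSC
      rw [← hSCn]
      rw [hbrK', hbrK] at *
      rw [hdecK, hcntK1, hbr0K]
      have hseedK : (if pvCell matrix p.1 p.2 = 'k' then (1 : Int) else 0)
          = (if pvKP matrix p.1 p.2 = true then (1 : Int) else 0) := by
        by_cases hk : pvCell matrix p.1 p.2 = 'k'
        · rw [if_pos hk, if_pos (by simp [pvKP, hk])]
        · rw [if_neg hk, if_neg (by simp [pvKP, hk])]
      rw [hseedK]
      by_cases hk : pvKP matrix p.1 p.2 = true
      · rw [if_pos hk, if_pos hk]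
        push_cast
        ring
      · rw [if_neg hk, if_neg hk]
        push_cast
        ring
    have hWval : (if pvCell matrix p.1 p.2 = 'v' then (1 : Int) else 0)
        + ((pvCnt (pvVP matrix) vis' : Int) - (pvCnt (pvVP matrix) (pvSet st.1 p.1 p.2) : Int))
        = pvWC N M matrix P (pvLab M P p) := by
      unfold pvWC
      rw [← hWCn]
      rw [hbrV', hbrV] at *
      rw [hdecV, hcntV1, hbr0V]
      have hseedV : (if pvCell matrix p.1 p.2 = 'v' then (1 : Int) else 0)
          = (if pvVP matrix p.1 p.2 = true then (1 : Int) else 0) := by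
        by_cases hk : pvCell matrix p.1 p.2 = 'v'
        · rw [if_pos hk, if_pos (by simp [pvVP, hk])]
        · rw [if_neg hk, if_neg (by simp [pvVP, hk])]
      rw [hseedV]
      by_cases hk : pvVP matrix p.1 p.2 = true
      · rw [if_pos hk, if_pos hk]
        push_cast
        ring
      · rw [if_neg hk, if_neg hk]
        push_cast
        ring
    have hOCpos : pvOC N M matrix P (pvLab M P p) = true ↔
        0 < (pvCells N M).countP (fun x => pvCmpB N M matrix P p x && pvBP N M x.1 x.2) := by
      unfold pvOC
      rw [List.any_eq_true, List.countP_pos_iff]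
      constructor
      · rintro ⟨x, hx, hpx⟩
        refine ⟨x, hx, ?_⟩
        unfold pvCmpB
        simpa using hpx
      · rintro ⟨x, hx, hpx⟩
        refine ⟨x, hx, ?_⟩
        unfold pvCmpB at hpx
        simpa using hpx
    have hFval : ((! pvBdry N M p.1 p.2)
        && (pvCnt (pvBP N M) vis' == pvCnt (pvBP N M) (pvSet st.1 p.1 p.2)))
        = ! pvOC N M matrix P (pvLab M P p) := by
      by_cases hBp : pvBdry N M p.1 p.2 = true
      · have hoc : pvOC N M matrix P (pvLab M P p) = true := by
          unfold pvOC
          rw [List.any_eq_true]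
          refine ⟨p, hpm, ?_⟩
          simp [pvPassB, hcond.1, pvBB, hBp]
        rw [hBp, hoc]
        rfl
      · have hBp' : pvBdry N M p.1 p.2 = false := by
          rcases hb : pvBdry N M p.1 p.2 with _ | _
          · rfl
          · exact absurd hb hBp
        rw [hBp']
        rw [hbrB', hbrB] at *
        rw [hdecB, hcntB1, hbr0B]
        have hifB : (if pvBP N M p.1 p.2 = true then 1 else 0) = 0 := by
          rw [if_neg (by simp [pvBP, hBp'])]
        rw [hifB, Nat.add_zero]
        apply pvBool_eq
        rcases Nat.eq_zero_or_pos ((pvCells N M).countP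
            (fun x => pvCmpB N M matrix P p x && pvBP N M x.1 x.2)) with hz | hpos
        · rw [hz, Nat.add_zero]
          have hoc : pvOC N M matrix P (pvLab M P p) = false := by
            rcases ho : pvOC N M matrix P (pvLab M P p) with _ | _
            · rfl
            · have := hOCpos.mp ho
              omega
          rw [hoc]
          simp
        · have hoc := hOCpos.mpr hpos
          rw [hoc]
          have hne : ((pvCells N M).countP
                (fun x => pvGet st.1 x.1 x.2 && pvBP N M x.1 x.2)
              + (pvCells N M).countP (fun x => pvCmpB N M matrix P p x && pvBP N M x.1 x.2)
              == (pvCells N M).countP (fun x => pvGet st.1 x.1 x.2 && pvBP N M x.1 x.2))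
              = false := by
            rw [beq_eq_false_iff_ne]
            omega
          rw [hne]
          simp
    -- visited-set characterisation after the flood
    have hvis' : ∀ q, pvVS vis' q ↔
        (pvPass N M matrix q ∧ ∃ s ∈ L ++ [p], pvPass N M matrix s ∧ pvReach N M matrix s q) := by
      intro q
      rw [hrv2]
      constructor
      · rintro (hv | hr)
        · obtain ⟨hq, s, hs, hps, hrr⟩ := (hvis q).mp hv
          exact ⟨hq, s, List.mem_append_left _ hs, hps, hrr⟩
        · exact ⟨pvReach_pass N M matrix hpass hr,
            p, List.mem_append_right _ (by simp), hpass, hr⟩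
      · rintro ⟨hq, s, hs, hps, hrr⟩
        rcases List.mem_append.mp hs with hs | hs
        · exact Or.inl ((hvis q).mpr ⟨hq, s, hs, hps, hrr⟩)
        · have : s = p := by simpa using hs
          rw [this] at hrr
          exact Or.inr hrr
    -- per-branch count bookkeeping
    have hdecKS := pvCntP_decomp N M (pvCmpB N M matrix P p) hiff hdis
      (fun x => pvKB matrix x && pvSurvS N M matrix P (pvLab M P x))
    have hdecWS := pvCntP_decomp N M (pvCmpB N M matrix P p) hiff hdis
      (fun x => pvVB matrix x && pvSurvW N M matrix P (pvLab M P x))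
    have hcKS : (pvCells N M).countP
        (fun x => pvCmpB N M matrix P p x
          && (pvKB matrix x && pvSurvS N M matrix P (pvLab M P x)))
        = (if pvSurvS N M matrix P (pvLab M P p) = true
            then (pvCells N M).countP
              (fun x => pvPassB matrix x && (pvLab M P x == pvLab M P p) && pvKB matrix x)
            else 0) := by
      by_cases hss : pvSurvS N M matrix P (pvLab M P p) = true
      · rw [if_pos hss]
        apply List.countP_congr
        intro x _
        unfold pvCmpB
        rcases hbq : (pvLab M P x == pvLab M P p) with _ | _
        · simp
        · have : pvLab M P x = pvLab M P p := by simpa using hbq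
          rw [this, hss]
          simp
      · rw [if_neg hss]
        rw [List.countP_eq_zero]
        intro x _ hx
        unfold pvCmpB at hx
        simp only [Bool.and_eq_true, beq_iff_eq] at hx
        rw [hx.1.2] at hx
        exact hss hx.2.2
    have hcWS : (pvCells N M).countP
        (fun x => pvCmpB N M matrix P p x
          && (pvVB matrix x && pvSurvW N M matrix P (pvLab M P x)))
        = (if pvSurvW N M matrix P (pvLab M P p) = true
            then (pvCells N M).countP
              (fun x => pvPassB matrix x && (pvLab M P x == pvLab M P p) && pvVB matrix x)
            else 0) := by
      by_cases hss : pvSurvW N M matrix P (pvLab M P p) = true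
      · rw [if_pos hss]
        apply List.countP_congr
        intro x _
        unfold pvCmpB
        rcases hbq : (pvLab M P x == pvLab M P p) with _ | _
        · simp
        · have : pvLab M P x = pvLab M P p := by simpa using hbq
          rw [this, hss]
          simp
      · rw [if_neg hss]
        rw [List.countP_eq_zero]
        intro x _ hx
        unfold pvCmpB at hx
        simp only [Bool.and_eq_true, beq_iff_eq] at hx
        rw [hx.1.2] at hx
        exact hss hx.2.2
    -- now evaluate A's per-cell body
    have hcell : pvCellA N M matrix st p.1 p.2
        = (if (! pvOC N M matrix P (pvLab M P p)) = true then
            (if pvSC N M matrix P (pvLab M P p) > pvWC N M matrix P (pvLab M P p) then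
              (vis', st.2.1 + pvSC N M matrix P (pvLab M P p), st.2.2)
            else (vis', st.2.1, st.2.2 + pvWC N M matrix P (pvLab M P p)))
          else (vis', st.2.1 + pvSC N M matrix P (pvLab M P p),
            st.2.2 + pvWC N M matrix P (pvLab M P p))) := by
      dsimp only [pvCellA]
      rw [if_pos hcond]
      rw [heq]
      rw [hSval, hWval, hFval]
    rw [hcell]
    have hts' : st.2.1 + (if pvSurvS N M matrix P (pvLab M P p) = true
          then pvSC N M matrix P (pvLab M P p) else 0)
        = ((pvCells N M).countP
          (fun x => pvGet vis' x.1 x.2 &&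
            (pvKB matrix x && pvSurvS N M matrix P (pvLab M P x))) : Int) := by
      rw [hdecKS, hcKS, hts]
      unfold pvSC
      by_cases hss : pvSurvS N M matrix P (pvLab M P p) = true
      · rw [if_pos hss, if_pos hss]
        push_cast
        ring
      · rw [if_neg hss, if_neg hss]
        push_cast
        ring
    have htw' : st.2.2 + (if pvSurvW N M matrix P (pvLab M P p) = true
          then pvWC N M matrix P (pvLab M P p) else 0)
        = ((pvCells N M).countP
          (fun x => pvGet vis' x.1 x.2 &&
            (pvVB matrix x && pvSurvW N M matrix P (pvLab M P x))) : Int) := by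
      rw [hdecWS, hcWS, htw]
      unfold pvWC
      by_cases hss : pvSurvW N M matrix P (pvLab M P p) = true
      · rw [if_pos hss, if_pos hss]
        push_cast
        ring
      · rw [if_neg hss, if_neg hss]
        push_cast
        ring
    by_cases hoc : pvOC N M matrix P (pvLab M P p) = true
    · rw [hoc]
      simp only [Bool.not_true, Bool.false_eq_true, if_false]
      have hssT : pvSurvS N M matrix P (pvLab M P p) = true := by
        unfold pvSurvS
        rw [hoc]
        rfl
      have hswT : pvSurvW N M matrix P (pvLab M P p) = true := by
        unfold pvSurvW
        rw [hoc]
        rfl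
      refine ⟨hs', hvis', ?_, ?_⟩
      · rw [← hts', if_pos hssT]
      · rw [← htw', if_pos hswT]
    · have hoc' : pvOC N M matrix P (pvLab M P p) = false := by
        rcases ho : pvOC N M matrix P (pvLab M P p) with _ | _
        · rfl
        · exact absurd ho hoc
      rw [hoc']
      simp only [Bool.not_false, if_true]
      by_cases hgt : pvSC N M matrix P (pvLab M P p) > pvWC N M matrix P (pvLab M P p)
      · rw [if_pos hgt]
        have hssT : pvSurvS N M matrix P (pvLab M P p) = true := by
          unfold pvSurvS
          rw [hoc']
          simpa using hgt
        have hswF : pvSurvW N M matrix P (pvLab M P p) = false := by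
          unfold pvSurvW
          rw [hoc']
          simpa using hgt
        refine ⟨hs', hvis', ?_, ?_⟩
        · rw [← hts', if_pos hssT]
        · rw [← htw', hswF]
          simp
      · rw [if_neg hgt]
        have hssF : pvSurvS N M matrix P (pvLab M P p) = false := by
          unfold pvSurvS
          rw [hoc']
          simpa using hgt
        have hswT : pvSurvW N M matrix P (pvLab M P p) = true := by
          unfold pvSurvW
          rw [hoc']
          simpa using hgt
        refine ⟨hs', hvis', ?_, ?_⟩
        · rw [← hts', hssF]
          simp
        · rw [← htw', if_pos hswT]

  · have hstep : pvCellA N M matrix st p.1 p.2 = st := by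
      dsimp only [pvCellA]
      rw [if_neg hcond]
    rw [hstep]
    refine ⟨hsh, ?_, hts, htw⟩
    intro q
    rw [hvis q]
    constructor
    · rintro ⟨hq, s, hsmem, hsp, hr⟩
      exact ⟨hq, s, List.mem_append_left _ hsmem, hsp, hr⟩
    · rintro ⟨hq, s, hsmem, hsp, hr⟩
      rcases List.mem_append.mp hsmem with hsmem | hsmem
      · exact ⟨hq, s, hsmem, hsp, hr⟩
      · have hsp' : s = p := by simpa using hsmem
        rw [hsp'] at hsp hr
        by_cases hpassp : pvPassC (pvCell matrix p.1 p.2) = true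
        · -- p is passable but already visited: its component is already in the grid
          have hvp : pvVS st.1 p := by
            unfold pvVS
            rcases hv : pvGet st.1 p.1 p.2 with _ | _
            · exact absurd ⟨hpassp, hv⟩ hcond
            · rfl
          obtain ⟨_, s', hs'mem, hs'p, hr'⟩ := (hvis p).mp hvp
          exact ⟨hq, s', hs'mem, hs'p, hr'.trans hr⟩
        · exact absurd hsp.2.2.2.2 hpassp

lemma pvFoldA_inv (N M : Int) (hM : 0 < M) (hN : 0 < N) (matrix : List String)
    {P : List Int} (hInv1 : pvInv1 N M matrix (pvCells N M) P) :
    ∀ (L2 : List (Int × Int)), (∀ p ∈ L2, p ∈ pvCells N M) →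
    ∀ (st : List (List Bool) × Int × Int) (L1 : List (Int × Int)),
    pvInvA N M matrix P L1 st →
    pvInvA N M matrix P (L1 ++ L2)
      (L2.foldl (fun st p => pvCellA N M matrix st p.1 p.2) st) := by
  intro L2
  induction L2 with
  | nil => intro _ st L1 h; simpa using h
  | cons p L2 ih =>
    intro hmem st L1 h
    have h1 := pvCellA_inv N M hM hN matrix hInv1 (hmem p List.mem_cons_self) h
    have h2 := ih (fun q hq => hmem q (List.mem_cons_of_mem _ hq)) _ (L1 ++ [p]) h1
    simpa [List.append_assoc] using h2

lemma pvA_eq (N M : Int) (hM : 0 < M) (hN : 0 < N) (matrix : List String)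
    {P : List Int} (hInv1 : pvInv1 N M matrix (pvCells N M) P) :
    calc_survive N M matrix = [pvTS N M matrix P, pvTW N M matrix P] := by
  unfold calc_survive
  rw [pvFoldl_cells N M (fun st r c => pvCellA N M matrix st r c)]
  dsimp only
  have hbase : pvInvA N M matrix P [] (pvMkGrid N.toNat M.toNat, (0 : Int), (0 : Int)) := by
    refine ⟨pvShape_mkGrid N M, ?_, ?_, ?_⟩
    · intro q
      unfold pvVS
      rw [pvGet_mkGrid]
      simp
    · rw [List.countP_eq_zero.mpr ?_]
      · rfl
      · intro x _
        simp [pvGet_mkGrid]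
    · rw [List.countP_eq_zero.mpr ?_]
      · rfl
      · intro x _
        simp [pvGet_mkGrid]
  have hfin := pvFoldA_inv N M hM hN matrix hInv1 (pvCells N M) (fun _ h => h) _ [] hbase
  rw [List.nil_append] at hfin
  obtain ⟨hsh, hvis, hts, htw⟩ := hfin
  have hgp : ∀ x ∈ pvCells N M,
      pvGet ((pvCells N M).foldl (fun st p => pvCellA N M matrix st p.1 p.2)
        (pvMkGrid N.toNat M.toNat, (0 : Int), (0 : Int))).1 x.1 x.2
      = pvPassB matrix x := by
    intro x hx
    obtain ⟨hb1, hb2, hb3, hb4⟩ := (pvMem_cells N M x).mp hx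
    apply pvBool_eq
    have := hvis x
    unfold pvVS at this
    rw [this]
    constructor
    · rintro ⟨hq, -⟩
      exact hq.2.2.2.2
    · intro hpb
      have hpx : pvPass N M matrix x := ⟨hb1, hb2, hb3, hb4, hpb⟩
      exact ⟨hpx, x, hx, hpx, Relation.ReflTransGen.refl⟩
  congr 1
  · rw [hts]
    unfold pvTS
    congr 1
    apply List.countP_congr
    intro x hx
    rw [hgp x hx]
  · congr 1
    rw [htw]
    unfold pvTW
    congr 1
    apply List.countP_congr
    intro x hx
    rw [hgp x hx]

-- ---- B's second pass: dict invariants ----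

def pvInvB (N M : Int) (matrix : List String) (P : List Int) (L : List (Int × Int))
    (st : PySem.Dict Int Int × PySem.Dict Int Int × PySem.Dict Int Bool) : Prop :=
  st.1.keys = PySem.Set.ofList ((L.filter (fun x => pvPassB matrix x)).map (pvLab M P)) ∧
  (∀ l : Int, st.1.getD l 0
    = (L.countP (fun x => pvPassB matrix x && (pvLab M P x == l) && pvKB matrix x) : Int)) ∧
  (∀ l : Int, st.2.1.getD l 0
    = (L.countP (fun x => pvPassB matrix x && (pvLab M P x == l) && pvVB matrix x) : Int)) ∧
  (∀ l : Int, st.2.2.contains l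
    = L.any (fun x => pvPassB matrix x && (pvLab M P x == l) && pvBB N M x))

lemma pvSet_ofList_append {xs : List Int} {y : Int} :
    PySem.Set.ofList (xs ++ [y]) = PySem.Set.add (PySem.Set.ofList xs) y := by
  rw [PySem.Set.ofList_eq_foldl, PySem.Set.ofList_eq_foldl, List.foldl_append]
  rfl

lemma pvTally_step (N M : Int) (matrix : List String) (P : List Int)
    (p : Int × Int) (L : List (Int × Int))
    {st : PySem.Dict Int Int × PySem.Dict Int Int × PySem.Dict Int Bool}
    (h : pvInvB N M matrix P L st) :
    pvInvB N M matrix P (L ++ [p]) (pvTally N M matrix P st p.1 p.2) := by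
  obtain ⟨hK, hS, hW, hO⟩ := h
  unfold pvTally
  by_cases hpc : pvPassC (pvCell matrix p.1 p.2) = true
  · rw [if_pos hpc]
    have hpbp : pvPassB matrix p = true := hpc
    show pvInvB N M matrix P (L ++ [p])
      (st.1.insert (pvLab M P p)
        (st.1.getD (pvLab M P p) 0 + (if pvCell matrix p.1 p.2 = 'k' then 1 else 0)),
       st.2.1.insert (pvLab M P p)
        (st.2.1.getD (pvLab M P p) 0 + (if pvCell matrix p.1 p.2 = 'v' then 1 else 0)),
       if pvBdry N M p.1 p.2 = true then st.2.2.insert (pvLab M P p) true else st.2.2)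
    refine ⟨?_, ?_, ?_, ?_⟩
    · -- keys
      show (st.1.insert (pvLab M P p)
          (st.1.getD (pvLab M P p) 0 + (if pvCell matrix p.1 p.2 = 'k' then 1 else 0))).keys = _
      rw [List.filter_append, List.map_append]
      have hfp : List.filter (fun x => pvPassB matrix x) [p] = [p] := by
        simp [List.filter, hpbp]
      rw [hfp]
      simp only [List.map_cons, List.map_nil]
      rw [pvSet_ofList_append, ← hK]
      by_cases hc : st.1.contains (pvLab M P p) = true
      · rw [PySem.Dict.keys_insert_of_contains st.1 _ hc]
        have hmem : pvLab M P p ∈ st.1.keys := (PySem.Dict.contains_iff_mem_keys st.1 _).mp hc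
        unfold PySem.Set.add
        rw [if_pos ((PySem.Set.contains_iff _ _).mpr hmem)]
      · have hc' : st.1.contains (pvLab M P p) = false := by
          rcases hcc : st.1.contains (pvLab M P p) with _ | _
          · rfl
          · exact absurd hcc hc
        rw [PySem.Dict.keys_insert_of_not_contains st.1 _ hc']
        unfold PySem.Set.add
        have hnm : ¬ pvLab M P p ∈ st.1.keys := fun hm =>
          hc ((PySem.Dict.contains_iff_mem_keys st.1 _).mpr hm)
        rw [if_neg (fun hcon => hnm ((PySem.Set.contains_iff _ _).mp hcon))]
    · -- sheep counts
      intro l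
      show (st.1.insert (pvLab M P p)
          (st.1.getD (pvLab M P p) 0 + (if pvCell matrix p.1 p.2 = 'k' then 1 else 0))).getD l 0 = _
      rw [PySem.Dict.getD_insert, List.countP_append]
      by_cases hl : l = pvLab M P p
      · rw [if_pos hl, hl, hS (pvLab M P p)]
        have hone : List.countP
            (fun x => pvPassB matrix x && (pvLab M P x == pvLab M P p) && pvKB matrix x) [p]
            = (if pvCell matrix p.1 p.2 = 'k' then 1 else 0) := by
          simp only [List.countP_cons, List.countP_nil]
          by_cases hk : pvCell matrix p.1 p.2 = 'k'
          · rw [if_pos hk]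
            have hx : (pvPassB matrix p && (pvLab M P p == pvLab M P p) && pvKB matrix p) = true := by
              simp [hpbp, pvKB, hk]
            rw [hx]
            rfl
          · rw [if_neg hk]
            have hkb : pvKB matrix p = false := by
              simp [pvKB, hk]
            have hx : (pvPassB matrix p && (pvLab M P p == pvLab M P p) && pvKB matrix p) = false := by
              simp [hkb]
            rw [hx]
            rfl
        rw [hone]
        push_cast
        ring
      · rw [if_neg hl, hS l]
        have hzero : List.countP
            (fun x => pvPassB matrix x && (pvLab M P x == l) && pvKB matrix x) [p] = 0 := by
          simp only [List.countP_cons, List.countP_nil]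
          have hb : (pvLab M P p == l) = false := by
            rw [beq_eq_false_iff_ne]
            exact fun h => hl h.symm
          simp [hb]
        rw [hzero]
        push_cast
        ring
    · -- wolf counts
      intro l
      show (st.2.1.insert (pvLab M P p)
          (st.2.1.getD (pvLab M P p) 0 + (if pvCell matrix p.1 p.2 = 'v' then 1 else 0))).getD l 0 = _
      rw [PySem.Dict.getD_insert, List.countP_append]
      by_cases hl : l = pvLab M P p
      · rw [if_pos hl, hl, hW (pvLab M P p)]
        have hone : List.countP
            (fun x => pvPassB matrix x && (pvLab M P x == pvLab M P p) && pvVB matrix x) [p]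
            = (if pvCell matrix p.1 p.2 = 'v' then 1 else 0) := by
          simp only [List.countP_cons, List.countP_nil]
          by_cases hk : pvCell matrix p.1 p.2 = 'v'
          · rw [if_pos hk]
            have hx : (pvPassB matrix p && (pvLab M P p == pvLab M P p) && pvVB matrix p) = true := by
              simp [hpbp, pvVB, hk]
            rw [hx]
            rfl
          · rw [if_neg hk]
            have hkb : pvVB matrix p = false := by
              simp [pvVB, hk]
            have hx : (pvPassB matrix p && (pvLab M P p == pvLab M P p) && pvVB matrix p) = false := by
              simp [hkb]
            rw [hx]
            rfl
        rw [hone]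
        push_cast
        ring
      · rw [if_neg hl, hW l]
        have hzero : List.countP
            (fun x => pvPassB matrix x && (pvLab M P x == l) && pvVB matrix x) [p] = 0 := by
          simp only [List.countP_cons, List.countP_nil]
          have hb : (pvLab M P p == l) = false := by
            rw [beq_eq_false_iff_ne]
            exact fun h => hl h.symm
          simp [hb]
        rw [hzero]
        push_cast
        ring
    · -- boundary flags
      intro l
      show (if pvBdry N M p.1 p.2 = true then st.2.2.insert (pvLab M P p) true
          else st.2.2).contains l = _
      rw [List.any_append]
      by_cases hbd : pvBdry N M p.1 p.2 = true
      · rw [if_pos hbd, PySem.Dict.contains_insert, hO l]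
        have hone : List.any [p]
            (fun x => pvPassB matrix x && (pvLab M P x == l) && pvBB N M x)
            = (l == pvLab M P p) := by
          simp only [List.any_cons, List.any_nil, Bool.or_false]
          by_cases hl : l = pvLab M P p
          · rw [hl]
            simp [hpbp, pvBB, hbd]
          · have h1 : (pvLab M P p == l) = false := by
              rw [beq_eq_false_iff_ne]
              exact fun h => hl h.symm
            have h2 : (l == pvLab M P p) = false := by
              rw [beq_eq_false_iff_ne]
              exact hl
            simp [h1, h2]
        rw [hone, Bool.or_comm]
      · have hbd' : pvBdry N M p.1 p.2 = false := by
          rcases hb : pvBdry N M p.1 p.2 with _ | _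
          · rfl
          · exact absurd hb hbd
        rw [if_neg hbd, hO l]
        have hzero : List.any [p]
            (fun x => pvPassB matrix x && (pvLab M P x == l) && pvBB N M x) = false := by
          simp [pvBB, hbd']
        rw [hzero, Bool.or_false]
  · rw [if_neg hpc]
    have hpbp : pvPassB matrix p = false := by
      rcases hb : pvPassB matrix p with _ | _
      · rfl
      · exact absurd hb hpc
    refine ⟨?_, ?_, ?_, ?_⟩
    · rw [List.filter_append]
      have hfp : List.filter (fun x => pvPassB matrix x) [p] = [] := by
        simp [List.filter, hpbp]
      rw [hfp, List.append_nil, hK]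
    · intro l
      rw [hS l, List.countP_append]
      have hz : List.countP
          (fun x => pvPassB matrix x && (pvLab M P x == l) && pvKB matrix x) [p] = 0 := by
        simp [hpbp]
      rw [hz, Nat.add_zero]
    · intro l
      rw [hW l, List.countP_append]
      have hz : List.countP
          (fun x => pvPassB matrix x && (pvLab M P x == l) && pvVB matrix x) [p] = 0 := by
        simp [hpbp]
      rw [hz, Nat.add_zero]
    · intro l
      rw [hO l, List.any_append]
      have hz : List.any [p]
          (fun x => pvPassB matrix x && (pvLab M P x == l) && pvBB N M x) = false := by
        simp [hpbp]
      rw [hz, Bool.or_false]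

lemma pvTally_fold (N M : Int) (matrix : List String) (P : List Int) :
    ∀ (L2 : List (Int × Int))
      (st : PySem.Dict Int Int × PySem.Dict Int Int × PySem.Dict Int Bool)
      (L1 : List (Int × Int)), pvInvB N M matrix P L1 st →
    pvInvB N M matrix P (L1 ++ L2)
      (L2.foldl (fun st p => pvTally N M matrix P st p.1 p.2) st) := by
  intro L2
  induction L2 with
  | nil => intro st L1 h; simpa using h
  | cons p L2 ih =>
    intro st L1 h
    have h1 := pvTally_step N M matrix P p L1 h
    have h2 := ih _ (L1 ++ [p]) h1
    simpa [List.append_assoc] using h2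

lemma pvInvB_init (N M : Int) (matrix : List String) (P : List Int) :
    pvInvB N M matrix P [] (PySem.Dict.empty, PySem.Dict.empty, PySem.Dict.empty) := by
  refine ⟨?_, ?_, ?_, ?_⟩
  · simp [PySem.Dict.keys_empty, PySem.Set.ofList]
  · intro l
    rw [PySem.Dict.getD_empty]
    rfl
  · intro l
    rw [PySem.Dict.getD_empty]
    rfl
  · intro l
    rw [PySem.Dict.contains_empty]
    rfl

-- ---- summing per-label contributions back to per-cell counts ----

lemma pvCountP_split {α : Type} (l : List α) (p r : α → Bool) :
    l.countP p = l.countP (fun x => p x && r x) + l.countP (fun x => p x && !r x) := by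
  induction l with
  | nil => simp
  | cons a l ih =>
    simp only [List.countP_cons]
    rw [ih]
    by_cases hp : p a = true <;> by_cases hr : r a = true <;>
      simp [hp, hr] <;> omega

lemma pvSum_partition (lab : (Int × Int) → Int) (pb k : (Int × Int) → Bool) (q : Int → Bool) :
    ∀ (ks : List Int), ks.Nodup →
    ∀ (l : List (Int × Int)), (∀ x ∈ l, pb x = true → lab x ∈ ks) →
    (ks.map (fun l0 => if q l0 = true
        then l.countP (fun x => pb x && (lab x == l0) && k x) else 0)).sum
      = l.countP (fun x => pb x && (k x && q (lab x))) := by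
  intro ks
  induction ks with
  | nil =>
    intro _ l hcov
    simp only [List.map_nil, List.sum_nil]
    rw [eq_comm, List.countP_eq_zero]
    intro x hx hp
    simp only [Bool.and_eq_true] at hp
    exact absurd (hcov x hx hp.1) (List.not_mem_nil)
  | cons l0 ks ih =>
    intro hnd l hcov
    have hsplit := pvCountP_split l (fun x => pb x && (k x && q (lab x)))
      (fun x => lab x == l0)
    have hA : l.countP (fun x => (pb x && (k x && q (lab x))) && (lab x == l0))
        = (if q l0 = true
            then l.countP (fun x => pb x && (lab x == l0) && k x) else 0) := by
      by_cases hq : q l0 = true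
      · rw [if_pos hq]
        apply List.countP_congr
        intro x _
        rcases hbeq : (lab x == l0) with _ | _
        · simp
        · have hle : lab x = l0 := by simpa using hbeq
          rw [hle, hq]
          simp
      · rw [if_neg hq]
        rw [List.countP_eq_zero]
        intro x _ hx
        simp only [Bool.and_eq_true, beq_iff_eq] at hx
        rw [hx.2] at hx
        rw [hx.1.2.2] at hq
        exact hq rfl
    have hB : l.countP (fun x => (pb x && (k x && q (lab x))) && !(lab x == l0))
        = (l.filter (fun x => !(lab x == l0))).countP
            (fun x => pb x && (k x && q (lab x))) := by
      rw [List.countP_filter]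
    have hcov' : ∀ x ∈ l.filter (fun x => !(lab x == l0)), pb x = true → lab x ∈ ks := by
      intro x hx hp
      obtain ⟨hxl, hflt⟩ := List.mem_filter.mp hx
      have := hcov x hxl hp
      rcases List.mem_cons.mp this with h | h
      · rw [h] at hflt
        simp at hflt
      · exact h
    have hterm : ∀ l1 ∈ ks,
        (if q l1 = true
          then (l.filter (fun x => !(lab x == l0))).countP
            (fun x => pb x && (lab x == l1) && k x) else 0)
        = (if q l1 = true
          then l.countP (fun x => pb x && (lab x == l1) && k x) else 0) := by
      intro l1 hl1
      by_cases hq : q l1 = true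
      · rw [if_pos hq, if_pos hq]
        rw [List.countP_filter]
        apply List.countP_congr
        intro x _
        rcases hbeq : (lab x == l1) with _ | _
        · simp
        · have hle : lab x = l1 := by simpa using hbeq
          have hne : l1 ≠ l0 := by
            intro hcontra
            rw [hcontra] at hl1
            exact (List.nodup_cons.mp hnd).1 hl1
          have : (lab x == l0) = false := by
            rw [beq_eq_false_iff_ne, hle]
            exact hne
          simp [this]
      · rw [if_neg hq, if_neg hq]
    simp only [List.map_cons, List.sum_cons]
    rw [List.map_congr_left (fun l1 hl1 => (hterm l1 hl1).symm)]
    rw [ih (List.nodup_cons.mp hnd).2 _ hcov']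
    rw [← hA, ← hB]
    exact hsplit.symm

lemma pvB_eq (N M : Int) (matrix : List String) (P : List Int)
    (hInvB : pvInvB N M matrix P (pvCells N M)
      ((pvCells N M).foldl (fun st p => pvTally N M matrix P st p.1 p.2)
        (PySem.Dict.empty, PySem.Dict.empty, PySem.Dict.empty))) :
    ((pvCells N M).foldl (fun st p => pvTally N M matrix P st p.1 p.2)
        (PySem.Dict.empty, PySem.Dict.empty,
          PySem.Dict.empty)).1.items.foldl
      (fun acc kv =>
        if ((pvCells N M).foldl (fun st p => pvTally N M matrix P st p.1 p.2)
            (PySem.Dict.empty, PySem.Dict.empty, PySem.Dict.empty)).2.2.contains kv.1 then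
          (acc.1 + kv.2, acc.2 + ((pvCells N M).foldl
            (fun st p => pvTally N M matrix P st p.1 p.2)
            (PySem.Dict.empty, PySem.Dict.empty, PySem.Dict.empty)).2.1.getD kv.1 0)
        else if kv.2 > ((pvCells N M).foldl (fun st p => pvTally N M matrix P st p.1 p.2)
            (PySem.Dict.empty, PySem.Dict.empty, PySem.Dict.empty)).2.1.getD kv.1 0 then
          (acc.1 + kv.2, acc.2)
        else (acc.1, acc.2 + ((pvCells N M).foldl
            (fun st p => pvTally N M matrix P st p.1 p.2)
            (PySem.Dict.empty, PySem.Dict.empty, PySem.Dict.empty)).2.1.getD kv.1 0))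
      ((0 : Int), (0 : Int))
    = (pvTS N M matrix P, pvTW N M matrix P) := by
  obtain ⟨hK, hS, hW, hO⟩ := hInvB
  have hnodup : ((pvCells N M).foldl (fun st p => pvTally N M matrix P st p.1 p.2)
      (PySem.Dict.empty, PySem.Dict.empty, PySem.Dict.empty)).1.keys.Nodup := by
    rw [hK]
    exact PySem.Set.nodup_ofList _
  rw [PySem.Dict.items_eq_map_keys _ hnodup 0]
  rw [List.foldl_map]
  rw [PySem.List.foldl_congr_mem _ _
    (fun acc l0 =>
      (acc.1 + (if pvSurvS N M matrix P l0 = true then pvSC N M matrix P l0 else 0),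
       acc.2 + (if pvSurvW N M matrix P l0 = true then pvWC N M matrix P l0 else 0)))
    ((0 : Int), (0 : Int)) ?hcg]
  case hcg =>
    intro acc l0 hl0
    have e1 : ((pvCells N M).foldl (fun st p => pvTally N M matrix P st p.1 p.2)
        (PySem.Dict.empty, PySem.Dict.empty, PySem.Dict.empty)).1.getD l0 0
        = pvSC N M matrix P l0 := hS l0
    have e2 : ((pvCells N M).foldl (fun st p => pvTally N M matrix P st p.1 p.2)
        (PySem.Dict.empty, PySem.Dict.empty, PySem.Dict.empty)).2.1.getD l0 0
        = pvWC N M matrix P l0 := hW l0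
    have e3 : ((pvCells N M).foldl (fun st p => pvTally N M matrix P st p.1 p.2)
        (PySem.Dict.empty, PySem.Dict.empty, PySem.Dict.empty)).2.2.contains l0
        = pvOC N M matrix P l0 := hO l0
    dsimp only
    rw [e1, e2, e3]
    by_cases hoc : pvOC N M matrix P l0 = true
    · have hss : pvSurvS N M matrix P l0 = true := by
        unfold pvSurvS
        rw [hoc]
        rfl
      have hsw : pvSurvW N M matrix P l0 = true := by
        unfold pvSurvW
        rw [hoc]
        rfl
      rw [if_pos hoc, hss, hsw]
      simp
    · have hoc' : pvOC N M matrix P l0 = false := by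
        rcases ho : pvOC N M matrix P l0 with _ | _
        · rfl
        · exact absurd ho hoc
      rw [if_neg hoc]
      by_cases hgt : pvSC N M matrix P l0 > pvWC N M matrix P l0
      · have hss : pvSurvS N M matrix P l0 = true := by
          unfold pvSurvS
          rw [hoc']
          simpa using hgt
        have hsw : pvSurvW N M matrix P l0 = false := by
          unfold pvSurvW
          rw [hoc']
          simpa using hgt
        rw [if_pos hgt, hss, hsw]
        simp
      · have hss : pvSurvS N M matrix P l0 = false := by
          unfold pvSurvS
          rw [hoc']
          simpa using hgt
        have hsw : pvSurvW N M matrix P l0 = true := by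
          unfold pvSurvW
          rw [hoc']
          simpa using hgt
        rw [if_neg hgt, hss, hsw]
        simp
  rw [PySem.List.foldl_prod_mk
    (f := fun a l0 => a + (if pvSurvS N M matrix P l0 = true then pvSC N M matrix P l0 else 0))
    (g := fun a l0 => a + (if pvSurvW N M matrix P l0 = true then pvWC N M matrix P l0 else 0))]
  rw [PySem.List.foldl_add, PySem.List.foldl_add]
  have hcov : ∀ x ∈ pvCells N M, pvPassB matrix x = true →
      pvLab M P x ∈ ((pvCells N M).foldl (fun st p => pvTally N M matrix P st p.1 p.2)
        (PySem.Dict.empty, PySem.Dict.empty, PySem.Dict.empty)).1.keys := by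
    intro x hx hpb
    rw [hK, PySem.Set.mem_ofList]
    exact List.mem_map_of_mem (List.mem_filter.mpr ⟨hx, hpb⟩)
  have hsum : ∀ (k : (Int × Int) → Bool) (q : Int → Bool),
      (((pvCells N M).foldl (fun st p => pvTally N M matrix P st p.1 p.2)
        (PySem.Dict.empty, PySem.Dict.empty, PySem.Dict.empty)).1.keys.map
        (fun l0 => if q l0 = true
          then (((pvCells N M).countP
            (fun x => pvPassB matrix x && (pvLab M P x == l0) && k x) : Nat) : Int)
          else 0)).sum
      = (((pvCells N M).countP
          (fun x => pvPassB matrix x && (k x && q (pvLab M P x))) : Nat) : Int) := by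
    intro k q
    have hmc : (((pvCells N M).foldl (fun st p => pvTally N M matrix P st p.1 p.2)
        (PySem.Dict.empty, PySem.Dict.empty, PySem.Dict.empty)).1.keys.map
        (fun l0 => if q l0 = true
          then (((pvCells N M).countP
            (fun x => pvPassB matrix x && (pvLab M P x == l0) && k x) : Nat) : Int)
          else 0))
        = (((pvCells N M).foldl (fun st p => pvTally N M matrix P st p.1 p.2)
          (PySem.Dict.empty, PySem.Dict.empty, PySem.Dict.empty)).1.keys.map
          (fun l0 => if q l0 = true
            then (pvCells N M).countP
              (fun x => pvPassB matrix x && (pvLab M P x == l0) && k x)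
            else 0)).map (fun n : Nat => (n : Int)) := by
      rw [List.map_map]
      apply List.map_congr_left
      intro l0 _
      by_cases hq : q l0 = true
      · simp [hq]
      · simp [hq]
    rw [hmc, ← Nat.cast_list_sum]
    rw [pvSum_partition (pvLab M P) (pvPassB matrix) k q _ hnodup _ hcov]
  have h1 := hsum (pvKB matrix) (fun l0 => pvSurvS N M matrix P l0)
  have h2 := hsum (pvVB matrix) (fun l0 => pvSurvW N M matrix P l0)
  have hFS : (((pvCells N M).foldl (fun st p => pvTally N M matrix P st p.1 p.2)
      (PySem.Dict.empty, PySem.Dict.empty, PySem.Dict.empty)).1.keys.map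
      (fun l0 => if pvSurvS N M matrix P l0 = true then pvSC N M matrix P l0 else 0))
      = (((pvCells N M).foldl (fun st p => pvTally N M matrix P st p.1 p.2)
        (PySem.Dict.empty, PySem.Dict.empty, PySem.Dict.empty)).1.keys.map
        (fun l0 => if pvSurvS N M matrix P l0 = true
          then (((pvCells N M).countP
            (fun x => pvPassB matrix x && (pvLab M P x == l0) && pvKB matrix x) : Nat) : Int)
          else 0)) := by
    apply List.map_congr_left
    intro l0 _
    rfl
  have hFW : (((pvCells N M).foldl (fun st p => pvTally N M matrix P st p.1 p.2)
      (PySem.Dict.empty, PySem.Dict.empty, PySem.Dict.empty)).1.keys.map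
      (fun l0 => if pvSurvW N M matrix P l0 = true then pvWC N M matrix P l0 else 0))
      = (((pvCells N M).foldl (fun st p => pvTally N M matrix P st p.1 p.2)
        (PySem.Dict.empty, PySem.Dict.empty, PySem.Dict.empty)).1.keys.map
        (fun l0 => if pvSurvW N M matrix P l0 = true
          then (((pvCells N M).countP
            (fun x => pvPassB matrix x && (pvLab M P x == l0) && pvVB matrix x) : Nat) : Int)
          else 0)) := by
    apply List.map_congr_left
    intro l0 _
    rfl
  rw [hFS, hFW, h1, h2]
  unfold pvTS pvTW
  simp

-- ===== VERDICT (by name: the statement is the Claim_ definition above) =====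
theorem calc_survive_spec : Claim_equal_calc_survive := by
  intro N M matrix _ _
  unfold Spec_calc_survive
  by_cases hNM : 0 < N ∧ 0 < M
  · obtain ⟨hN, hM⟩ := hNM
    set P := (PySem.List.pyRange 0 N 1).foldl
      (fun par r => (PySem.List.pyRange 0 M 1).foldl
        (fun par c => pvUnite N M matrix par r c) par)
      (PySem.List.pyRange 0 (N * M) 1) with hP
    have hInv1 : pvInv1 N M matrix (pvCells N M) P := by
      rw [hP, pvFoldl_cells N M (fun par r c => pvUnite N M matrix par r c)]
      have h := pvPass1_fold N M hM matrix (pvCells N M)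
        (fun p hp => (pvMem_cells N M p).mp hp) _ [] (pvInv1_init N M hM hN matrix)
      simpa using h
    rw [pvA_eq N M hM hN matrix hInv1]
    unfold calc_survive_alt
    rw [if_neg (by omega : ¬ (N ≤ 0 ∨ M ≤ 0))]
    dsimp only
    rw [← hP]
    rw [pvFoldl_cells N M (fun st r c => pvTally N M matrix P st r c)]
    have hInvB := pvTally_fold N M matrix P (pvCells N M) _ [] (pvInvB_init N M matrix P)
    rw [List.nil_append] at hInvB
    rw [pvB_eq N M matrix P hInvB]
  · have hdeg : N ≤ 0 ∨ M ≤ 0 := by omega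
    have hB : calc_survive_alt N M matrix = [0, 0] := by
      unfold calc_survive_alt
      rw [if_pos hdeg]
    rw [hB]
    rcases hdeg with h | h
    · have hre : PySem.List.pyRange 0 N 1 = [] := PySem.List.pyRange_one_eq_nil h
      unfold calc_survive
      rw [hre]
      rfl
    · have hre : PySem.List.pyRange 0 M 1 = [] := PySem.List.pyRange_one_eq_nil h
      unfold calc_survive
      rw [hre]
      simp only [List.foldl_nil, PySem.List.foldl_ignore]
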